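-- pv_equiv track=rewrite | github.com/ChengChiaLee/onlineGo.github.io | mcts_server.py | capture_candidates
-- ===== SOURCE A (Python) =====
-- def neighbors(n, x, y):
--     if x > 0:      yield (x-1, y)
--     if x+1 < n:    yield (x+1, y)
--     if y > 0:      yield (x, y-1)
--     if y+1 < n:    yield (x, y+1)
--
-- def group_and_liberties(board, x0, y0):
--     n = len(board)
--     color = board[y0][x0]
--     stack = [(x0, y0)]
--     seen = set([(x0, y0)])
--     stones = []
--     liberties = set()
--
--     while stack:
--         x, y = stack.pop()
--         stones.append((x, y))
--         for nx, ny in neighbors(n, x, y):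
--             v = board[ny][nx]
--             if v == 0:
--                 liberties.add((nx, ny))
--             elif v == color and (nx, ny) not in seen:
--                 seen.add((nx, ny))
--                 stack.append((nx, ny))
--
--     return stones, liberties
--
-- def capture_candidates(board, player):
--     """Return set of empty points that would capture an opponent group in atari (1 liberty)."""
--     n = len(board)
--     opp = 2 if player == 1 else 1
--     cand = set()
--     seen = set()
--     for y in range(n):
--         for x in range(n):
--             if board[y][x] != opp:
--                 continue
--             if (x, y) in seen:
--                 continue
--             stones, libs = group_and_liberties(board, x, y)
--             for s in stones:
--                 seen.add(s)
--             if len(libs) == 1: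
--                 (lx, ly) = next(iter(libs))
--                 if board[ly][lx] == 0:
--                     cand.add((lx, ly))
--     return cand
-- ===== SOURCE B (Python) =====
-- def capture_candidates(board, player):
--     """Return set of empty points that would capture an opponent group in atari (1 liberty)."""
--     n = len(board)
--     opp = 2 if player == 1 else 1
--     parent = list(range(n * n))
--
--     def find(i):
--         while parent[i] != i:
--             i = parent[i]
--         return i
--
--     def union(a, b):
--         ra, rb = find(a), find(b)
--         if ra == rb:
--             return
--         if ra < rb:
--             parent[rb] = ra
--         else:
--             parent[ra] = rb
--
--     # pass 1: union each opponent stone with its right/down same-colored neighbor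
--     for y in range(n):
--         for x in range(n):
--             if board[y][x] != opp:
--                 continue
--             if x + 1 < n and board[y][x + 1] == opp:
--                 union(y * n + x, y * n + x + 1)
--             if y + 1 < n and board[y + 1][x] == opp:
--                 union(y * n + x, (y + 1) * n + x)
--     # pass 2: collect each group's liberties in a set keyed by its root
--     libs = {}
--     for y in range(n):
--         for x in range(n):
--             if board[y][x] != opp:
--                 continue
--             r = find(y * n + x)
--             if r not in libs:
--                 libs[r] = set()
--             for (nx, ny) in ((x - 1, y), (x + 1, y), (x, y - 1), (x, y + 1)):
--                 if 0 <= nx < n and 0 <= ny < n and board[ny][nx] == 0: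
--                     libs[r].add((nx, ny))
--     # groups whose liberty set is a single point capture at that point
--     cand = set()
--     for s in libs.values():
--         if len(s) == 1:
--             cand.add(next(iter(s)))
--     return cand
-- ===== Notes on version B (the rewrite author's own statement) =====
-- stated objective: alternative
-- what changed: Per-group DFS flood-fill (stack+seen, liberties collected during the walk) is replaced by a global two-pass union-find: one scan unions each opponent stone with its right/down same-colored neighbor, a second scan accumulates each group's liberty set in a dict keyed by the group's root, and roots with a single liberty yield the candidates.
import Mathlib
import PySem

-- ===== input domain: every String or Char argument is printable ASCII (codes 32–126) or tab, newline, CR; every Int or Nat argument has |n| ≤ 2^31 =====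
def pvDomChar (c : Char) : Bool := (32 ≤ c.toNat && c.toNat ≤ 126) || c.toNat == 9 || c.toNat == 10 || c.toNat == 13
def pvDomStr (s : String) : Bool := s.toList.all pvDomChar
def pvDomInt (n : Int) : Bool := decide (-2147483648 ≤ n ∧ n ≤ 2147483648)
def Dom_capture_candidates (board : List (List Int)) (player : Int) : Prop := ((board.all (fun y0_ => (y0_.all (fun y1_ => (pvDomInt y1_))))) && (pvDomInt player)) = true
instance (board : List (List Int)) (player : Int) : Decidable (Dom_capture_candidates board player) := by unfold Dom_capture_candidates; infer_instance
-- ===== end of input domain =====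

-- B replaces the per-group DFS flood-fill by a global two-pass union-find labeling (alternative
-- algorithm/data structure, similar cost); equivalence is about the return value only.

-- ===== PORT A =====
-- board[y][x] (both ports); total form is sound because Pre_ keeps every access in range
def pvCell (board : List (List Int)) (x y : Int) : Int :=
  PySem.List.pyGetD (PySem.List.pyGetD board y []) x 0

-- the `neighbors` generator, as the list it yields
def pvNeighbors (n x y : Int) : List (Int × Int) :=
  (if 0 < x then [(x - 1, y)] else []) ++
  (if x + 1 < n then [(x + 1, y)] else []) ++
  (if 0 < y then [(x, y - 1)] else []) ++
  (if y + 1 < n then [(x, y + 1)] else [])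

-- the `while stack:` loop of group_and_liberties; fuel n*n+1 is an artifact of totalization,
-- proved sufficient below (the loop runs at most n*n times)
def pvGalLoop (board : List (List Int)) (n color : Int) :
    Nat → List (Int × Int) → PySem.Set (Int × Int) → List (Int × Int) → PySem.Set (Int × Int) →
    List (Int × Int) × PySem.Set (Int × Int)
  | 0, _, _, stones, libs => (stones, libs)
  | fuel + 1, stack, seen, stones, libs =>
    match stack.getLast? with
    | none => (stones, libs)
    | some (x, y) =>
      let stack' := stack.dropLast
      let stones' := stones ++ [(x, y)]
      let st := (pvNeighbors n x y).foldl
        (fun (st : List (Int × Int) × PySem.Set (Int × Int) × PySem.Set (Int × Int)) nb =>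
          let v := pvCell board nb.1 nb.2
          if v = 0 then (st.1, st.2.1, PySem.Set.add st.2.2 nb)
          else if v = color ∧ nb ∉ st.2.1 then (st.1 ++ [nb], PySem.Set.add st.2.1 nb, st.2.2)
          else st)
        (stack', seen, libs)
      pvGalLoop board n color fuel st.1 st.2.1 stones' st.2.2

def pvGAL (board : List (List Int)) (x0 y0 : Int) : List (Int × Int) × PySem.Set (Int × Int) :=
  let n : Int := PySem.List.len board
  let color := pvCell board x0 y0
  pvGalLoop board n color (board.length * board.length + 1)
    [(x0, y0)] (PySem.Set.ofList [(x0, y0)]) [] []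

def capture_candidates (board : List (List Int)) (player : Int) : List (Int × Int) :=
  let n : Int := PySem.List.len board
  let opp : Int := if player = 1 then 2 else 1
  let res := (PySem.List.pyRange 0 n 1).foldl (fun st y =>
    (PySem.List.pyRange 0 n 1).foldl (fun (st : PySem.Set (Int × Int) × PySem.Set (Int × Int)) x =>
      if pvCell board x y ≠ opp then st
      else if (x, y) ∈ st.2 then st
      else
        let gl := pvGAL board x y
        let seen' := gl.1.foldl (fun s p => PySem.Set.add s p) st.2
        if PySem.Set.len gl.2 = 1 then
          -- next(iter(libs)) on a one-element set: its single element
          match gl.2.head? with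
          | some e => if pvCell board e.1 e.2 = 0 then (PySem.Set.add st.1 e, seen') else (st.1, seen')
          | none => (st.1, seen')
        else (st.1, seen')) st) (([], []) : PySem.Set (Int × Int) × PySem.Set (Int × Int))
  res.1

-- ===== PORT B =====
-- the `while parent[i] != i:` loop of find; fuel i+1 is an artifact of totalization, sufficient
-- because parent[j] ≤ j always holds (union points the larger root at the smaller one)
def pvFindLoop (parent : List Int) : Nat → Int → Int
  | 0, i => i
  | fuel + 1, i =>
    if PySem.List.pyGetD parent i 0 ≠ i then pvFindLoop parent fuel (PySem.List.pyGetD parent i 0)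
    else i

def pvFind (parent : List Int) (i : Int) : Int := pvFindLoop parent (i.toNat + 1) i

def pvUnion (parent : List Int) (a b : Int) : List Int :=
  let ra := pvFind parent a
  let rb := pvFind parent b
  if ra = rb then parent
  else if ra < rb then PySem.List.pySetD parent rb ra
  else PySem.List.pySetD parent ra rb

def capture_candidates_alt (board : List (List Int)) (player : Int) : List (Int × Int) :=
  let n : Int := PySem.List.len board
  let opp : Int := if player = 1 then 2 else 1
  let parent0 : List Int := PySem.List.pyRange 0 (n * n) 1
  -- pass 1: union each opponent stone with its right/down same-colored neighbor
  let parent := (PySem.List.pyRange 0 n 1).foldl (fun par y =>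
    (PySem.List.pyRange 0 n 1).foldl (fun par x =>
      if pvCell board x y ≠ opp then par
      else
        let par := if x + 1 < n ∧ pvCell board (x + 1) y = opp
                   then pvUnion par (y * n + x) (y * n + x + 1) else par
        if y + 1 < n ∧ pvCell board x (y + 1) = opp
        then pvUnion par (y * n + x) ((y + 1) * n + x) else par) par) parent0
  -- pass 2: collect each group's liberties in a set keyed by its root
  let libs := (PySem.List.pyRange 0 n 1).foldl (fun libs y =>
    (PySem.List.pyRange 0 n 1).foldl (fun (libs : PySem.Dict Int (PySem.Set (Int × Int))) x =>
      if pvCell board x y ≠ opp then libs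
      else
        let r := pvFind parent (y * n + x)
        let libs := if libs.contains r then libs else libs.insert r []
        [(x - 1, y), (x + 1, y), (x, y - 1), (x, y + 1)].foldl (fun libs nb =>
          if 0 ≤ nb.1 ∧ nb.1 < n ∧ 0 ≤ nb.2 ∧ nb.2 < n ∧ pvCell board nb.1 nb.2 = 0
          then PySem.Dict.modify libs r [] (fun s => PySem.Set.add s nb) else libs) libs) libs)
    PySem.Dict.empty
  -- groups whose liberty set is a single point capture at that point
  (PySem.Dict.values libs).foldl (fun cand s =>
    if PySem.Set.len s = 1 then
      match s.head? with
      | some e => PySem.Set.add cand e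
      | none => cand
    else cand) []

-- ===== PRECONDITION & SPEC =====
-- Pre_ excludes exactly the ragged boards (a row shorter than len(board)), on which the Python A
-- raises IndexError while scanning.
def Pre_capture_candidates (board : List (List Int)) (player : Int) : Prop :=
  ∀ row ∈ board, board.length ≤ row.length
instance (board : List (List Int)) (player : Int) : Decidable (Pre_capture_candidates board player) := by
  unfold Pre_capture_candidates; infer_instance

def pvWitness_capture_candidates : List (List Int) × Int := ([[2, 0], [0, 1]], 1)

def Spec_capture_candidates (board : List (List Int)) (player : Int) (out : List (Int × Int)) : Prop := out = capture_candidates_alt board player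
instance (board : List (List Int)) (player : Int) (out : List (Int × Int)) : Decidable (Spec_capture_candidates board player out) := by unfold Spec_capture_candidates; infer_instance

-- ===== CLAIM (what is proved, stated in full; the proofs are below) =====
def Claim_equal_capture_candidates : Prop := ∀ (board : List (List Int)) (player : Int), Dom_capture_candidates board player → Pre_capture_candidates board player → Spec_capture_candidates board player (capture_candidates board player)

-- ===== LEMMAS AND PROOFS =====

/- ---------- proof-side vocabulary ---------- -/

-- the scan order both mains share: (x, y) with y outer, x inner
def pvCells (n : Int) : List (Int × Int) :=
  (PySem.List.pyRange 0 n 1).flatMap (fun y => (PySem.List.pyRange 0 n 1).map (fun x => (x, y)))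

def pvGrid (n : Int) (p : Int × Int) : Prop := 0 ≤ p.1 ∧ p.1 < n ∧ 0 ≤ p.2 ∧ p.2 < n

def pvStone (board : List (List Int)) (opp : Int) (p : Int × Int) : Prop :=
  pvGrid (board.length : Int) p ∧ pvCell board p.1 p.2 = opp

def pvAdj (p q : Int × Int) : Prop :=
  (p.1 = q.1 ∧ (q.2 = p.2 + 1 ∨ p.2 = q.2 + 1)) ∨ (p.2 = q.2 ∧ (q.1 = p.1 + 1 ∨ p.1 = q.1 + 1))

def pvStep (board : List (List Int)) (opp : Int) (p q : Int × Int) : Prop :=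
  pvStone board opp p ∧ pvStone board opp q ∧ pvAdj p q

def pvConn (board : List (List Int)) (opp : Int) : Int × Int → Int × Int → Prop :=
  Relation.EqvGen (pvStep board opp)

def pvIdx (n : Int) (p : Int × Int) : Int := p.2 * n + p.1

def pvIsLib (board : List (List Int)) (opp : Int) (c e : Int × Int) : Prop :=
  pvGrid (board.length : Int) e ∧ pvCell board e.1 e.2 = 0 ∧
    ∃ p, pvStone board opp p ∧ pvConn board opp c p ∧ pvAdj p e

def pvScanLt (p q : Int × Int) : Prop := p.2 < q.2 ∨ (p.2 = q.2 ∧ p.1 < q.1)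

/- ---------- generic list / fold helpers ---------- -/

theorem pvFoldlNested {σ : Type} (ys xs : List Int) (f : σ → (Int × Int) → σ) (init : σ) :
    ys.foldl (fun s y => xs.foldl (fun s x => f s (x, y)) s) init
      = (ys.flatMap (fun y => xs.map (fun x => (x, y)))).foldl f init := by
  induction ys generalizing init with
  | nil => rfl
  | cons y ys ih => simp only [List.flatMap_cons, List.foldl_append, List.foldl_cons, List.foldl_map, ih]

theorem pvEGsymm {α : Type} {r : α → α → Prop} {a b : α} (h : Relation.EqvGen r a b) :
    Relation.EqvGen r b a := Relation.EqvGen.symm a b h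

theorem pvEGtrans {α : Type} {r : α → α → Prop} {a b c : α} (h1 : Relation.EqvGen r a b)
    (h2 : Relation.EqvGen r b c) : Relation.EqvGen r a c := Relation.EqvGen.trans a b c h1 h2

theorem pvPyRange01 (n : Int) :
    PySem.List.pyRange 0 n 1 = List.map (fun k : Nat => (k : Int)) (List.range n.toNat) := by
  rcases (by omega : 0 ≤ n ∨ n < 0) with h | h
  · rw [← PySem.List.pyRange_zero_natCast n.toNat, Int.toNat_of_nonneg h]
  · have h1 : PySem.List.pyRange 0 n 1 = [] := by
      apply List.eq_nil_iff_forall_not_mem.2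
      intro x hx
      have := PySem.List.mem_pyRange_one.1 hx
      omega
    have h2 : n.toNat = 0 := by omega
    simp [h1, h2]

theorem pvCells_mem (n : Int) (p : Int × Int) : p ∈ pvCells n ↔ pvGrid n p := by
  rcases p with ⟨a, b⟩
  simp only [pvCells, List.mem_flatMap, List.mem_map, PySem.List.mem_pyRange_one, pvGrid,
    Prod.mk.injEq]
  constructor
  · rintro ⟨y, hy, x, hx, rfl, rfl⟩
    exact ⟨hx.1, hx.2, hy.1, hy.2⟩
  · rintro ⟨h1, h2, h3, h4⟩
    exact ⟨b, ⟨h3, h4⟩, a, ⟨h1, h2⟩, rfl, rfl⟩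

theorem pvCells_pairwise (n : Int) : (pvCells n).Pairwise pvScanLt := by
  unfold pvCells
  rw [List.pairwise_flatMap]
  have hpw : (PySem.List.pyRange 0 n 1).Pairwise (· < ·) := by
    rw [pvPyRange01, List.pairwise_map]
    exact (List.pairwise_lt_range).imp (fun {a b} h => by exact_mod_cast h)
  constructor
  · intro y _
    rw [List.pairwise_map]
    exact hpw.imp (by intro a b h; exact Or.inr ⟨rfl, h⟩)
  · apply hpw.imp
    intro y1 y2 h p hp q hq
    simp only [List.mem_map] at hp hq
    obtain ⟨x1, _, rfl⟩ := hp
    obtain ⟨x2, _, rfl⟩ := hq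
    exact Or.inl h

theorem pvCells_length (n : Int) : (pvCells n).length = n.toNat * n.toNat := by
  simp only [pvCells, pvPyRange01, List.length_flatMap, List.map_map, List.length_map]
  simp [Function.comp_def, List.map_const']

-- along a decomposition cells = P ++ c :: rest, "before c in the scan" = "∈ P"
theorem pvPrefix_mem (n : Int) (P rest : List (Int × Int)) (c : Int × Int)
    (h : pvCells n = P ++ c :: rest) (c' : Int × Int) :
    c' ∈ P ↔ pvGrid n c' ∧ pvScanLt c' c := by
  have hpw := pvCells_pairwise n
  rw [h, List.pairwise_append] at hpw
  obtain ⟨_, hc, hcross⟩ := hpw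
  rw [List.pairwise_cons] at hc
  constructor
  · intro hP
    refine ⟨(pvCells_mem n c').1 ?_, hcross c' hP c (List.mem_cons_self)⟩
    rw [h]; exact List.mem_append_left _ hP
  · rintro ⟨hg, hlt⟩
    have : c' ∈ P ++ c :: rest := by rw [← h]; exact (pvCells_mem n c').2 hg
    rcases List.mem_append.1 this with hP | hm
    · exact hP
    · rcases List.mem_cons.1 hm with rfl | hr
      · exfalso; unfold pvScanLt at hlt; omega
      · have := hc.1 c' hr
        exfalso; unfold pvScanLt at hlt this; omega

theorem pvNodupSubsetLength {α : Type} [DecidableEq α] (l L : List α) (hn : l.Nodup)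
    (hs : ∀ x ∈ l, x ∈ L) : l.length ≤ L.length := by
  calc l.length = l.toFinset.card := (List.toFinset_card_of_nodup hn).symm
    _ ≤ L.toFinset.card := Finset.card_le_card (by
        intro x hx
        exact List.mem_toFinset.2 (hs x (List.mem_toFinset.1 hx)))
    _ ≤ L.length := List.toFinset_card_le L

-- a nodup list with the same members as [e] is [e]
theorem pvNodupSingleton {α : Type} (t : List α) (e : α) (hn : t.Nodup)
    (hm : ∀ x, x ∈ t ↔ x = e) : t = [e] := by
  rcases t with _ | ⟨x, xs⟩
  · exact absurd ((hm e).2 rfl) (List.not_mem_nil)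
  · have hx : x = e := (hm x).1 List.mem_cons_self
    subst hx
    rcases xs with _ | ⟨y, ys⟩
    · rfl
    · have hy : y = x := (hm y).1 (List.mem_cons_of_mem _ List.mem_cons_self)
      subst hy
      simp at hn

theorem pvNodupSameMemLength {α : Type} [DecidableEq α] (s t : List α) (hs : s.Nodup) (ht : t.Nodup)
    (hm : ∀ x, x ∈ s ↔ x ∈ t) : s.length = t.length := by
  exact Nat.le_antisymm (pvNodupSubsetLength s t hs fun x hx => (hm x).1 hx)
    (pvNodupSubsetLength t s ht fun x hx => (hm x).2 hx)

/- ---------- geometry ---------- -/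

theorem pvAdj_symm {p q : Int × Int} (h : pvAdj p q) : pvAdj q p := by
  unfold pvAdj at h ⊢; omega

theorem pvMemNeighbors (n : Int) (x y : Int) (h : pvGrid n (x, y)) (q : Int × Int) :
    q ∈ pvNeighbors n x y ↔ pvAdj (x, y) q ∧ pvGrid n q := by
  rcases q with ⟨a, b⟩
  obtain ⟨h1, h2, h3, h4⟩ := h
  dsimp at h1 h2 h3 h4
  simp only [pvNeighbors, List.mem_append, List.mem_ite_nil_right, List.mem_singleton,
    Prod.mk.injEq, pvAdj, pvGrid]
  omega

theorem pvIteSublist {α : Type} (c : Prop) [Decidable c] (l : List α) :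
    (if c then l else []).Sublist l := by
  split
  · exact List.Sublist.refl l
  · exact List.nil_sublist l

theorem pvNeighbors_nodup (n x y : Int) : (pvNeighbors n x y).Nodup := by
  have hsub : (pvNeighbors n x y).Sublist [(x - 1, y), (x + 1, y), (x, y - 1), (x, y + 1)] := by
    unfold pvNeighbors
    have := ((((pvIteSublist (0 < x) [(x - 1, y)]).append
      (pvIteSublist (x + 1 < n) [(x + 1, y)])).append
      (pvIteSublist (0 < y) [(x, y - 1)])).append
      (pvIteSublist (y + 1 < n) [(x, y + 1)]))
    simpa using this
  refine List.Nodup.sublist hsub ?_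
  simp [List.nodup_cons, Prod.ext_iff]
  omega

theorem pvIdx_inj (n : Int) {p q : Int × Int} (hp : pvGrid n p) (hq : pvGrid n q)
    (h : pvIdx n p = pvIdx n q) : p = q := by
  rcases p with ⟨a, b⟩; rcases q with ⟨c, d⟩
  obtain ⟨h1, h2, h3, h4⟩ := hp; obtain ⟨h5, h6, h7, h8⟩ := hq
  unfold pvIdx at h
  dsimp at *
  have hb : b = d := by nlinarith
  simp only [Prod.mk.injEq]
  constructor
  · nlinarith
  · exact hb

theorem pvIdx_range (n : Int) {p : Int × Int} (hp : pvGrid n p) :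
    0 ≤ pvIdx n p ∧ pvIdx n p < n * n := by
  rcases p with ⟨a, b⟩
  obtain ⟨h1, h2, h3, h4⟩ := hp
  unfold pvIdx
  dsimp at *
  constructor
  · nlinarith
  · nlinarith

/- ---------- EqvGen utilities ---------- -/

theorem pvEqvGen_nil {α : Type} (L : List (α × α)) (hL : L = []) (i j : α) :
    Relation.EqvGen (fun a b => (a, b) ∈ L) i j ↔ i = j := by
  subst hL
  constructor
  · intro h
    induction h with
    | rel a b hab => simp at hab
    | refl a => rfl
    | symm a b _ ih => exact ih.symm
    | trans a b c _ _ ih1 ih2 => exact ih1.trans ih2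
  · rintro rfl
    exact Relation.EqvGen.refl i

-- adding one edge to a pair list: what the closure becomes
theorem pvEqvGen_append {α : Type} (L : List (α × α)) (a b i j : α) :
    Relation.EqvGen (fun u v => (u, v) ∈ L ++ [(a, b)]) i j ↔
      (Relation.EqvGen (fun u v => (u, v) ∈ L) i j ∨
       (Relation.EqvGen (fun u v => (u, v) ∈ L) i a ∧ Relation.EqvGen (fun u v => (u, v) ∈ L) b j) ∨
       (Relation.EqvGen (fun u v => (u, v) ∈ L) i b ∧ Relation.EqvGen (fun u v => (u, v) ∈ L) a j)) := by
  set E := fun u v => (u, v) ∈ L with hE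
  constructor
  · intro h
    induction h with
    | rel u v huv =>
      rcases List.mem_append.1 huv with hm | hm
      · exact Or.inl (Relation.EqvGen.rel _ _ hm)
      · simp only [List.mem_singleton, Prod.mk.injEq] at hm
        exact Or.inr (Or.inl ⟨hm.1 ▸ Relation.EqvGen.refl _, hm.2 ▸ Relation.EqvGen.refl _⟩)
    | refl u => exact Or.inl (Relation.EqvGen.refl u)
    | symm u v _ ih =>
      rcases ih with h1 | ⟨h2, h3⟩ | ⟨h2, h3⟩
      · exact Or.inl (pvEGsymm h1)
      · exact Or.inr (Or.inr ⟨pvEGsymm h3, pvEGsymm h2⟩)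
      · exact Or.inr (Or.inl ⟨pvEGsymm h3, pvEGsymm h2⟩)
    | trans u v w _ _ ih1 ih2 =>
      rcases ih1 with h1 | ⟨h2, h3⟩ | ⟨h2, h3⟩ <;>
        rcases ih2 with g1 | ⟨g2, g3⟩ | ⟨g2, g3⟩
      · exact Or.inl (pvEGtrans h1 g1)
      · exact Or.inr (Or.inl ⟨pvEGtrans h1 g2, g3⟩)
      · exact Or.inr (Or.inr ⟨pvEGtrans h1 g2, g3⟩)
      · exact Or.inr (Or.inl ⟨h2, pvEGtrans h3 g1⟩)
      · exact Or.inr (Or.inl ⟨h2, g3⟩)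
      · exact Or.inl (pvEGtrans h2 g3)
      · exact Or.inr (Or.inr ⟨h2, pvEGtrans h3 g1⟩)
      · exact Or.inl (pvEGtrans h2 g3)
      · exact Or.inr (Or.inr ⟨h2, g3⟩)
  · have hmono : ∀ u v, E u v → Relation.EqvGen (fun u v => (u, v) ∈ L ++ [(a, b)]) u v := by
      intro u v huv
      exact Relation.EqvGen.rel _ _ (List.mem_append_left _ huv)
    have hab : Relation.EqvGen (fun u v => (u, v) ∈ L ++ [(a, b)]) a b :=
      Relation.EqvGen.rel _ _ (List.mem_append_right _ (List.mem_singleton.2 rfl))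
    rintro (h1 | ⟨h2, h3⟩ | ⟨h2, h3⟩)
    · exact Relation.EqvGen.mono (fun u v h => List.mem_append_left _ h) h1
    · exact pvEGtrans (pvEGtrans (Relation.EqvGen.mono (fun u v h => List.mem_append_left _ h) h2)
        hab) (Relation.EqvGen.mono (fun u v h => List.mem_append_left _ h) h3)
    · exact pvEGtrans (pvEGtrans (Relation.EqvGen.mono (fun u v h => List.mem_append_left _ h) h2)
        (pvEGsymm hab)) (Relation.EqvGen.mono (fun u v h => List.mem_append_left _ h) h3)

theorem pvEqvGen_endpoints {α : Type} (L : List (α × α)) (i j : α)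
    (h : Relation.EqvGen (fun u v => (u, v) ∈ L) i j) :
    i = j ∨ ((∃ e ∈ L, i = e.1 ∨ i = e.2) ∧ ∃ e ∈ L, j = e.1 ∨ j = e.2) := by
  induction h with
  | rel u v huv => exact Or.inr ⟨⟨(u, v), huv, Or.inl rfl⟩, ⟨(u, v), huv, Or.inr rfl⟩⟩
  | refl u => exact Or.inl rfl
  | symm u v _ ih => rcases ih with rfl | ⟨h1, h2⟩; exacts [Or.inl rfl, Or.inr ⟨h2, h1⟩]
  | trans u v w _ _ ih1 ih2 =>
    rcases ih1 with rfl | ⟨h1, h2⟩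
    · exact ih2
    · rcases ih2 with rfl | ⟨h3, h4⟩
      · exact Or.inr ⟨h1, h2⟩
      · exact Or.inr ⟨h1, h4⟩

/- ---------- union-find ---------- -/

def pvUFInv (N : Nat) (par : List Int) : Prop :=
  par.length = N ∧ ∀ j : Nat, j < N → 0 ≤ par.getD j 0 ∧ par.getD j 0 ≤ (j : Int)

theorem pvPyGetD_toNat (par : List Int) (i : Int) (h0 : 0 ≤ i) :
    PySem.List.pyGetD par i 0 = par.getD i.toNat 0 := by
  rw [← Int.toNat_of_nonneg h0, PySem.List.pyGetD_natCast, Int.toNat_of_nonneg h0]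

theorem pvFindLoop_succ (par : List Int) (k : Nat) (i : Int) (h0 : 0 ≤ i) :
    pvFindLoop par (k + 1) i =
      if par.getD i.toNat 0 = i then i else pvFindLoop par k (par.getD i.toNat 0) := by
  rw [show pvFindLoop par (k+1) i = (if PySem.List.pyGetD par i 0 ≠ i then
      pvFindLoop par k (PySem.List.pyGetD par i 0) else i) from rfl, pvPyGetD_toNat par i h0]
  by_cases h : par.getD i.toNat 0 = i
  · simp [h]
  · simp [h]

-- fuel irrelevance for the find loop, under the invariant
theorem pvFindLoop_fuel (N : Nat) (par : List Int) (hInv : pvUFInv N par) :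
    ∀ m : Nat, ∀ i : Int, 0 ≤ i → i.toNat < N → i.toNat ≤ m →
      ∀ k : Nat, i.toNat < k → pvFindLoop par k i = pvFindLoop par (i.toNat + 1) i := by
  intro m
  induction m with
  | zero =>
    intro i h0 hN hm k hk
    have hi0 : i = 0 := by omega
    subst hi0
    have hroot : par.getD 0 0 = 0 := by
      have := hInv.2 0 (by simpa using hN)
      omega
    obtain ⟨k', rfl⟩ : ∃ k', k = k' + 1 := ⟨k - 1, by omega⟩
    rw [pvFindLoop_succ par k' 0 le_rfl, pvFindLoop_succ par (Int.toNat 0) 0 le_rfl]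
    have hroot' : par.getD (Int.toNat 0) 0 = 0 := by simpa using hroot
    rw [if_pos hroot', if_pos hroot']
  | succ m ih =>
    intro i h0 hN hm k hk
    obtain ⟨k', rfl⟩ : ∃ k', k = k' + 1 := ⟨k - 1, by omega⟩
    rw [pvFindLoop_succ par k' i h0, pvFindLoop_succ par i.toNat i h0]
    by_cases hroot : par.getD i.toNat 0 = i
    · rw [if_pos hroot, if_pos hroot]
    · have hp := hInv.2 i.toNat hN
      set p := par.getD i.toNat 0 with hpdef
      have hplt : p.toNat < i.toNat := by omega
      rw [if_neg hroot, if_neg hroot, ih p hp.1 (by omega) (by omega) k' (by omega),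
        ih p hp.1 (by omega) (by omega) i.toNat (by omega)]

-- one unfolding of find, under the invariant
theorem pvFind_unfold (N : Nat) (par : List Int) (hInv : pvUFInv N par) (i : Int)
    (h0 : 0 ≤ i) (hN : i.toNat < N) :
    pvFind par i = if par.getD i.toNat 0 = i then i else pvFind par (par.getD i.toNat 0) := by
  rw [pvFind, pvFindLoop_succ par i.toNat i h0]
  by_cases hroot : par.getD i.toNat 0 = i
  · rw [if_pos hroot, if_pos hroot]
  · have hp := hInv.2 i.toNat hN
    set p := par.getD i.toNat 0 with hpdef
    rw [if_neg hroot, if_neg hroot, pvFind]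
    exact pvFindLoop_fuel N par hInv p.toNat p hp.1 (by omega) le_rfl i.toNat (by omega)

theorem pvFind_of_self (N : Nat) (par : List Int) (hInv : pvUFInv N par) (i : Int)
    (h0 : 0 ≤ i) (hN : i.toNat < N) (hroot : par.getD i.toNat 0 = i) :
    pvFind par i = i := by
  rw [pvFind_unfold N par hInv i h0 hN, if_pos hroot]

theorem pvFind_root (N : Nat) (par : List Int) (hInv : pvUFInv N par) (i : Int)
    (h0 : 0 ≤ i) (hN : i.toNat < N) :
    par.getD (pvFind par i).toNat 0 = pvFind par i ∧ 0 ≤ pvFind par i ∧ pvFind par i ≤ i := by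
  have H : ∀ m : Nat, ∀ i : Int, 0 ≤ i → i.toNat < N → i.toNat ≤ m →
      par.getD (pvFind par i).toNat 0 = pvFind par i ∧ 0 ≤ pvFind par i ∧ pvFind par i ≤ i := by
    intro m
    induction m with
    | zero =>
      intro i h0 hN hm
      have hi0 : i = 0 := by omega
      subst hi0
      have hroot : par.getD 0 0 = 0 := by
        have := hInv.2 0 (by simpa using hN)
        omega
      have hroot' : par.getD (Int.toNat 0) 0 = 0 := by simpa using hroot
      rw [pvFind_unfold N par hInv 0 le_rfl (by simpa using hN), if_pos hroot']
      exact ⟨by simpa using hroot, le_rfl, le_rfl⟩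
    | succ m ih =>
      intro i h0 hN hm
      rw [pvFind_unfold N par hInv i h0 hN]
      by_cases hroot : par.getD i.toNat 0 = i
      · rw [if_pos hroot]
        exact ⟨hroot, h0, le_rfl⟩
      · have hp := hInv.2 i.toNat hN
        rw [if_neg hroot]
        obtain ⟨ha, hb, hc⟩ := ih (par.getD i.toNat 0) hp.1 (by omega) (by omega)
        exact ⟨ha, hb, by omega⟩
  exact H i.toNat i h0 hN le_rfl

-- pointing root r2 at root r1 < r2 re-roots exactly r2's class
theorem pvFind_set (N : Nat) (par : List Int) (hInv : pvUFInv N par) (r1 r2 : Int)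
    (h1 : 0 ≤ r1) (h2 : r1 < r2) (hN : r2.toNat < N)
    (hr1 : par.getD r1.toNat 0 = r1) (hr2 : par.getD r2.toNat 0 = r2) :
    pvUFInv N (PySem.List.pySetD par r2 r1) ∧
      ∀ i : Int, 0 ≤ i → i.toNat < N →
        pvFind (PySem.List.pySetD par r2 r1) i = if pvFind par i = r2 then r1 else pvFind par i := by
  have hset : PySem.List.pySetD par r2 r1 = par.set r2.toNat r1 := by
    rw [← Int.toNat_of_nonneg (by omega : (0:Int) ≤ r2), PySem.List.pySetD_natCast,
      Int.toNat_of_nonneg (by omega : (0:Int) ≤ r2)]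
  have hlen : r2.toNat < par.length := by rw [hInv.1]; exact hN
  have hgetD : ∀ j : Nat, (par.set r2.toNat r1).getD j 0 =
      if j = r2.toNat then r1 else par.getD j 0 := by
    intro j
    rcases lt_or_ge j par.length with hj | hj
    · rw [List.getD_eq_getElem?_getD, List.getElem?_set, List.getD_eq_getElem?_getD]
      split
      · next h => rw [if_pos h.symm]; simp [hj]
      · next h => rw [if_neg (fun hh => h hh.symm)]
    · rw [List.getD_eq_getElem?_getD, List.getElem?_eq_none (by simpa using hj),
        List.getD_eq_getElem?_getD, List.getElem?_eq_none (by omega)]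
      rw [if_neg (by omega)]
  have hInv' : pvUFInv N (PySem.List.pySetD par r2 r1) := by
    rw [hset]
    refine ⟨by simpa using hInv.1, ?_⟩
    intro j hj
    rw [hgetD j]
    split
    · next h => subst h; constructor <;> omega
    · exact hInv.2 j hj
  refine ⟨hInv', ?_⟩
  have H : ∀ m : Nat, ∀ i : Int, 0 ≤ i → i.toNat < N → i.toNat ≤ m →
      pvFind (PySem.List.pySetD par r2 r1) i = if pvFind par i = r2 then r1 else pvFind par i := by
    intro m
    induction m with
    | zero =>
      intro i h0 hN' hm
      have hi0 : i = 0 := by omega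
      subst hi0
      have h00 : par.getD 0 0 = 0 := by have := hInv.2 0 (by omega); omega
      have hf0 : pvFind par 0 = 0 := pvFind_of_self N par hInv 0 le_rfl (by omega) h00
      have hr2' : (0:Int) ≠ r2 := by omega
      have h00' : (PySem.List.pySetD par r2 r1).getD 0 0 = 0 := by
        rw [hset, hgetD 0, if_neg (by omega)]; exact h00
      rw [pvFind_of_self N _ hInv' 0 le_rfl (by omega) h00', hf0, if_neg hr2']
    | succ m ih =>
      intro i h0 hN' hm
      rw [pvFind_unfold N _ hInv' i h0 hN', hset, hgetD i.toNat]
      by_cases hir2 : i.toNat = r2.toNat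
      · have hieq : i = r2 := by omega
        subst hieq
        rw [if_pos rfl]
        have hfr2 : pvFind par i = i := pvFind_of_self N par hInv i (by omega) hN' hr2
        have hner : r1 ≠ i := by omega
        rw [if_neg hner, ← hset]
        have hr1N : r1.toNat < N := by omega
        rw [ih r1 h1 hr1N (by omega)]
        have hfr1 : pvFind par r1 = r1 := pvFind_of_self N par hInv r1 h1 hr1N hr1
        rw [hfr1, if_neg (by omega), hfr2, if_pos rfl]
      · rw [if_neg hir2]
        by_cases hroot : par.getD i.toNat 0 = i
        · rw [if_pos hroot]
          rw [pvFind_of_self N par hInv i h0 hN' hroot]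
          by_cases hieq : i = r2
          · exact absurd (by omega : i.toNat = r2.toNat) hir2
          · rw [if_neg hieq]
        · rw [if_neg hroot, ← hset]
          have hp := hInv.2 i.toNat hN'
          rw [ih (par.getD i.toNat 0) hp.1 (by omega) (by omega)]
          rw [pvFind_unfold N par hInv i h0 hN', if_neg hroot]
  intro i h0 hN'
  exact H i.toNat i h0 hN' le_rfl

-- the whole point of union-find: after folding pvUnion over a pair list, two indices share a
-- root exactly when the pairs connect them
theorem pvUF_classes (N : Nat) (L : List (Int × Int))
    (hL : ∀ e ∈ L, 0 ≤ e.1 ∧ e.1.toNat < N ∧ 0 ≤ e.2 ∧ e.2.toNat < N) :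
    pvUFInv N (L.foldl (fun par e => pvUnion par e.1 e.2) (PySem.List.pyRange 0 (N : Int) 1)) ∧
      ∀ i j : Int, 0 ≤ i → i.toNat < N → 0 ≤ j → j.toNat < N →
        (pvFind (L.foldl (fun par e => pvUnion par e.1 e.2) (PySem.List.pyRange 0 (N : Int) 1)) i =
         pvFind (L.foldl (fun par e => pvUnion par e.1 e.2) (PySem.List.pyRange 0 (N : Int) 1)) j ↔
         Relation.EqvGen (fun u v => (u, v) ∈ L) i j) := by
  induction L using List.reverseRecOn with
  | nil =>
    have hget : ∀ j : Nat, j < N →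
        (PySem.List.pyRange 0 (N : Int) 1).getD j 0 = (j : Int) := by
      intro j hj
      rw [pvPyRange01]
      have hto : (N : Int).toNat = N := by omega
      rw [hto, List.getD_eq_getElem?_getD, List.getElem?_map, List.getElem?_range hj]
      rfl
    have hlen : (PySem.List.pyRange 0 (N : Int) 1).length = N := by
      rw [pvPyRange01]; simp
    have hInv : pvUFInv N (PySem.List.pyRange 0 (N : Int) 1) :=
      ⟨hlen, fun j hj => by rw [hget j hj]; omega⟩
    have hfind : ∀ i : Int, 0 ≤ i → i.toNat < N →
        pvFind (PySem.List.pyRange 0 (N : Int) 1) i = i := by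
      intro i h0 hNi
      exact pvFind_of_self N _ hInv i h0 hNi (by rw [hget i.toNat hNi]; omega)
    simp only [List.foldl_nil]
    refine ⟨hInv, ?_⟩
    intro i j h0i hNi h0j hNj
    rw [hfind i h0i hNi, hfind j h0j hNj, pvEqvGen_nil [] rfl]
  | append_singleton L e ih =>
    obtain ⟨a, b⟩ := e
    have hLsub : ∀ e' ∈ L, 0 ≤ e'.1 ∧ e'.1.toNat < N ∧ 0 ≤ e'.2 ∧ e'.2.toNat < N :=
      fun e' he' => hL e' (List.mem_append_left _ he')
    obtain ⟨hInv, hcls⟩ := ih hLsub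
    obtain ⟨h0a, hNa, h0b, hNb⟩ := hL (a, b) (List.mem_append_right _ (List.mem_singleton.2 rfl))
    set par := L.foldl (fun par e => pvUnion par e.1 e.2) (PySem.List.pyRange 0 (N : Int) 1)
      with hpar
    have hgoalfold : (L ++ [(a, b)]).foldl (fun par e => pvUnion par e.1 e.2)
        (PySem.List.pyRange 0 (N : Int) 1) = pvUnion par a b := by
      rw [List.foldl_append]; rfl
    rw [hgoalfold]
    obtain ⟨hra_root, hra0, hra_le⟩ := pvFind_root N par hInv a h0a hNa
    obtain ⟨hrb_root, hrb0, hrb_le⟩ := pvFind_root N par hInv b h0b hNb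
    have hraN : (pvFind par a).toNat < N := by omega
    have hrbN : (pvFind par b).toNat < N := by omega
    by_cases heq : pvFind par a = pvFind par b
    · have hpar' : pvUnion par a b = par := by
        unfold pvUnion
        rw [if_pos heq]
      rw [hpar']
      refine ⟨hInv, ?_⟩
      intro i j h0i hNi h0j hNj
      rw [hcls i j h0i hNi h0j hNj, pvEqvGen_append]
      have hab : Relation.EqvGen (fun u v => (u, v) ∈ L) a b :=
        (hcls a b h0a hNa h0b hNb).1 heq
      constructor
      · exact Or.inl
      · rintro (h | ⟨h1, h2⟩ | ⟨h1, h2⟩)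
        · exact h
        · exact pvEGtrans h1 (pvEGtrans hab h2)
        · exact pvEGtrans h1 (pvEGtrans (pvEGsymm hab) h2)
    · have hiff : ∀ i j : Int, 0 ≤ i → i.toNat < N → 0 ≤ j → j.toNat < N →
          (Relation.EqvGen (fun u v => (u, v) ∈ L ++ [(a, b)]) i j ↔
            (pvFind par i = pvFind par j ∨
             (pvFind par i = pvFind par a ∧ pvFind par b = pvFind par j) ∨
             (pvFind par i = pvFind par b ∧ pvFind par a = pvFind par j))) := by
        intro i j h0i hNi h0j hNj
        rw [pvEqvGen_append, ← hcls i j h0i hNi h0j hNj, ← hcls i a h0i hNi h0a hNa,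
          ← hcls b j h0b hNb h0j hNj, ← hcls i b h0i hNi h0b hNb, ← hcls a j h0a hNa h0j hNj]
      by_cases hlt : pvFind par a < pvFind par b
      · have hpar' : pvUnion par a b = PySem.List.pySetD par (pvFind par b) (pvFind par a) := by
          unfold pvUnion
          rw [if_neg heq, if_pos hlt]
        rw [hpar']
        obtain ⟨hInv', hfind'⟩ :=
          pvFind_set N par hInv (pvFind par a) (pvFind par b) hra0 hlt hrbN hra_root hrb_root
        refine ⟨hInv', ?_⟩
        intro i j h0i hNi h0j hNj
        rw [hfind' i h0i hNi, hfind' j h0j hNj, hiff i j h0i hNi h0j hNj]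
        split_ifs with c1 c2 c2 <;> constructor <;> intro hh <;> omega
      · have hgt : pvFind par b < pvFind par a := by omega
        have hpar' : pvUnion par a b = PySem.List.pySetD par (pvFind par a) (pvFind par b) := by
          unfold pvUnion
          rw [if_neg heq, if_neg hlt]
        rw [hpar']
        obtain ⟨hInv', hfind'⟩ :=
          pvFind_set N par hInv (pvFind par b) (pvFind par a) hrb0 hgt hraN hrb_root hra_root
        refine ⟨hInv', ?_⟩
        intro i j h0i hNi h0j hNj
        rw [hfind' i h0i hNi, hfind' j h0j hNj, hiff i j h0i hNi h0j hNj]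
        split_ifs with c1 c2 c2 <;> constructor <;> intro hh <;> omega

/- ---------- pass 1 as a fold over generated union pairs ---------- -/

def pvPairsOf (board : List (List Int)) (opp n : Int) (c : Int × Int) : List (Int × Int) :=
  (if c.1 + 1 < n ∧ pvCell board (c.1 + 1) c.2 = opp
   then [(c.2 * n + c.1, c.2 * n + c.1 + 1)] else []) ++
  (if c.2 + 1 < n ∧ pvCell board c.1 (c.2 + 1) = opp
   then [(c.2 * n + c.1, (c.2 + 1) * n + c.1)] else [])

def pvPairs (board : List (List Int)) (opp n : Int) : List (Int × Int) :=
  (pvCells n).flatMap (fun c =>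
    if pvCell board c.1 c.2 = opp then pvPairsOf board opp n c else [])

def pvPass1 (board : List (List Int)) (opp n : Int) : List Int :=
  (PySem.List.pyRange 0 n 1).foldl (fun par y =>
    (PySem.List.pyRange 0 n 1).foldl (fun par x =>
      if pvCell board x y ≠ opp then par
      else
        let par := if x + 1 < n ∧ pvCell board (x + 1) y = opp
                   then pvUnion par (y * n + x) (y * n + x + 1) else par
        if y + 1 < n ∧ pvCell board x (y + 1) = opp
        then pvUnion par (y * n + x) ((y + 1) * n + x) else par) par)
    (PySem.List.pyRange 0 (n * n) 1)

theorem pvPass1_eq (board : List (List Int)) (opp n : Int) :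
    pvPass1 board opp n =
      (pvPairs board opp n).foldl (fun par e => pvUnion par e.1 e.2)
        (PySem.List.pyRange 0 (n * n) 1) := by
  unfold pvPass1 pvPairs
  rw [pvFoldlNested (PySem.List.pyRange 0 n 1) (PySem.List.pyRange 0 n 1)
    (fun par c =>
      if pvCell board c.1 c.2 ≠ opp then par
      else
        let par := if c.1 + 1 < n ∧ pvCell board (c.1 + 1) c.2 = opp
                   then pvUnion par (c.2 * n + c.1) (c.2 * n + c.1 + 1) else par
        if c.2 + 1 < n ∧ pvCell board c.1 (c.2 + 1) = opp
        then pvUnion par (c.2 * n + c.1) ((c.2 + 1) * n + c.1) else par)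
    (PySem.List.pyRange 0 (n * n) 1)]
  rw [show ((PySem.List.pyRange 0 n 1).flatMap
      (fun y => (PySem.List.pyRange 0 n 1).map (fun x => (x, y)))) = pvCells n from rfl]
  have hflat : ((pvCells n).flatMap
        (fun c => if pvCell board c.1 c.2 = opp then pvPairsOf board opp n c else [])).foldl
        (fun par e => pvUnion par e.1 e.2) (PySem.List.pyRange 0 (n * n) 1)
      = (pvCells n).foldl
        (fun par c => ((if pvCell board c.1 c.2 = opp then pvPairsOf board opp n c else []).foldl
          (fun par e => pvUnion par e.1 e.2) par)) (PySem.List.pyRange 0 (n * n) 1) := by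
    generalize (PySem.List.pyRange 0 (n * n) 1) = init
    induction pvCells n generalizing init with
    | nil => rfl
    | cons c cs ihc => simp only [List.flatMap_cons, List.foldl_append, List.foldl_cons, ihc]
  rw [hflat]
  apply PySem.List.foldl_congr_mem
  intro par c _
  by_cases hc : pvCell board c.1 c.2 = opp
  · rw [if_neg (by simpa using hc), if_pos hc]
    unfold pvPairsOf
    by_cases h1 : c.1 + 1 < n ∧ pvCell board (c.1 + 1) c.2 = opp <;>
      by_cases h2 : c.2 + 1 < n ∧ pvCell board c.1 (c.2 + 1) = opp <;>
      simp [h1, h2]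
  · rw [if_pos (by simpa using hc), if_neg hc]
    rfl

-- membership in the generated pairs: exactly the right/down bonds between opponent stones
theorem pvPairs_mem (board : List (List Int)) (opp : Int) (ab : Int × Int) :
    ab ∈ pvPairs board opp (board.length : Int) ↔
      ∃ p q, pvStone board opp p ∧ pvStone board opp q ∧ pvAdj p q ∧
        ab.1 = pvIdx (board.length : Int) p ∧ ab.2 = pvIdx (board.length : Int) q ∧
        (q = (p.1 + 1, p.2) ∨ q = (p.1, p.2 + 1)) := by
  unfold pvPairs pvPairsOf
  rw [List.mem_flatMap]
  constructor
  · rintro ⟨c, hc, hmem⟩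
    have hcg : pvGrid (board.length : Int) c := (pvCells_mem _ c).1 hc
    rw [List.mem_ite_nil_right] at hmem
    obtain ⟨hcopp, hmem⟩ := hmem
    rcases List.mem_append.1 hmem with hm | hm <;> rw [List.mem_ite_nil_right] at hm
    · obtain ⟨⟨hlt, hq⟩, hab⟩ := hm
      rw [List.mem_singleton] at hab
      subst hab
      have hg2 : pvGrid (board.length : Int) (c.1 + 1, c.2) := by
        obtain ⟨g1, g2, g3, g4⟩ := hcg; exact ⟨by omega, by omega, g3, g4⟩
      exact ⟨c, (c.1 + 1, c.2), ⟨hcg, hcopp⟩, ⟨hg2, hq⟩, Or.inr ⟨rfl, Or.inl rfl⟩,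
        rfl, add_assoc _ _ _, Or.inl rfl⟩
    · obtain ⟨⟨hlt, hq⟩, hab⟩ := hm
      rw [List.mem_singleton] at hab
      subst hab
      have hg2 : pvGrid (board.length : Int) (c.1, c.2 + 1) := by
        obtain ⟨g1, g2, g3, g4⟩ := hcg; exact ⟨g1, g2, by omega, by omega⟩
      exact ⟨c, (c.1, c.2 + 1), ⟨hcg, hcopp⟩, ⟨hg2, hq⟩, Or.inl ⟨rfl, Or.inl rfl⟩,
        rfl, rfl, Or.inr rfl⟩
  · rintro ⟨p, q, hp, hq, hadj, hab1, hab2, hrd⟩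
    refine ⟨p, (pvCells_mem _ p).2 hp.1, ?_⟩
    rw [List.mem_ite_nil_right]
    refine ⟨hp.2, ?_⟩
    rw [List.mem_append, List.mem_ite_nil_right, List.mem_ite_nil_right]
    rcases hrd with rfl | rfl
    · refine Or.inl ⟨⟨?_, by simpa using hq.2⟩, ?_⟩
      · have := hq.1.2.1; dsimp at this; omega
      · rw [List.mem_singleton, Prod.ext_iff]
        refine ⟨?_, ?_⟩
        · rw [hab1]; rfl
        · rw [hab2]; exact (add_assoc _ _ _).symm
    · refine Or.inr ⟨⟨?_, by simpa using hq.2⟩, ?_⟩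
      · have := hq.1.2.2.2; dsimp at this; omega
      · rw [List.mem_singleton, Prod.ext_iff]
        exact ⟨by rw [hab1]; rfl, by rw [hab2]; rfl⟩

theorem pvConn_stones (board : List (List Int)) (opp : Int) {a b : Int × Int}
    (h : pvConn board opp a b) : a = b ∨ (pvStone board opp a ∧ pvStone board opp b) := by
  induction h with
  | rel u v huv => exact Or.inr ⟨huv.1, huv.2.1⟩
  | refl u => exact Or.inl rfl
  | symm u v _ ih => rcases ih with rfl | ⟨h1, h2⟩; exacts [Or.inl rfl, Or.inr ⟨h2, h1⟩]
  | trans u v w _ _ ih1 ih2 =>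
    rcases ih1 with rfl | ⟨h1, h2⟩
    · exact ih2
    · rcases ih2 with rfl | ⟨h3, h4⟩
      · exact Or.inr ⟨h1, h2⟩
      · exact Or.inr ⟨h1, h4⟩

-- indices related by the generated pairs are exactly connected stones
theorem pvPairsEqv_iff_conn (board : List (List Int)) (opp : Int) {p q : Int × Int}
    (hp : pvStone board opp p) (hq : pvStone board opp q) :
    Relation.EqvGen (fun u v => (u, v) ∈ pvPairs board opp (board.length : Int))
      (pvIdx (board.length : Int) p) (pvIdx (board.length : Int) q) ↔
    pvConn board opp p q := by
  constructor
  · intro h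
    have key : ∀ i j : Int,
        Relation.EqvGen (fun u v => (u, v) ∈ pvPairs board opp (board.length : Int)) i j →
        ∀ p q : Int × Int, pvStone board opp p → pvStone board opp q →
          pvIdx (board.length : Int) p = i → pvIdx (board.length : Int) q = j →
          pvConn board opp p q := by
      intro i j h
      induction h with
      | rel u v huv =>
        intro p q hp hq hpi hqj
        obtain ⟨p', q', hp', hq', hadj, h1, h2, _⟩ := (pvPairs_mem board opp (u, v)).1 huv
        have hpp : p = p' := pvIdx_inj _ hp.1 hp'.1 (by rw [hpi]; exact h1)
        have hqq : q = q' := pvIdx_inj _ hq.1 hq'.1 (by rw [hqj]; exact h2)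
        subst hpp; subst hqq
        exact Relation.EqvGen.rel _ _ ⟨hp, hq, hadj⟩
      | refl u =>
        intro p q hp hq hpi hqj
        have : p = q := pvIdx_inj _ hp.1 hq.1 (by rw [hpi, hqj])
        subst this
        exact Relation.EqvGen.refl p
      | symm u v _ ih =>
        intro p q hp hq hpi hqj
        exact pvEGsymm (ih q p hq hp hqj hpi)
      | trans u v w h1 _ ih1 ih2 =>
        intro p q hp hq hpi hqj
        rcases pvEqvGen_endpoints _ u v h1 with rfl | ⟨_, he⟩
        · exact ih2 p q hp hq hpi hqj
        · obtain ⟨e, hemem, hor⟩ := he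
          obtain ⟨p', q', hp', hq', _, h1e, h2e, _⟩ := (pvPairs_mem board opp e).1 hemem
          obtain ⟨m, hm, hvm⟩ : ∃ m, pvStone board opp m ∧ pvIdx (board.length : Int) m = v := by
            rcases hor with hv | hv
            · exact ⟨p', hp', by rw [← h1e, hv]⟩
            · exact ⟨q', hq', by rw [← h2e, hv]⟩
          exact pvEGtrans (ih1 p m hp hm hpi hvm) (ih2 m q hm hq hvm hqj)
    exact key _ _ h p q hp hq rfl rfl
  · intro h
    induction h with
    | rel a b hstep =>
      obtain ⟨ha, hb, hadj⟩ := hstep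
      have hcase := hadj
      unfold pvAdj at hcase
      rcases hcase with ⟨h1, h2 | h2⟩ | ⟨h1, h2 | h2⟩
      · -- b is below a
        have hb' : b = (a.1, a.2 + 1) := by
          rw [Prod.ext_iff]; constructor <;> dsimp <;> omega
        exact Relation.EqvGen.rel _ _
          ((pvPairs_mem board opp _).2 ⟨a, b, ha, hb, hadj, rfl, rfl, Or.inr hb'⟩)
      · -- a is below b
        have ha' : a = (b.1, b.2 + 1) := by
          rw [Prod.ext_iff]; constructor <;> dsimp <;> omega
        exact pvEGsymm (Relation.EqvGen.rel _ _
          ((pvPairs_mem board opp _).2 ⟨b, a, hb, ha, pvAdj_symm hadj, rfl, rfl, Or.inr ha'⟩))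
      · -- b is right of a
        have hb' : b = (a.1 + 1, a.2) := by
          rw [Prod.ext_iff]; constructor <;> dsimp <;> omega
        exact Relation.EqvGen.rel _ _
          ((pvPairs_mem board opp _).2 ⟨a, b, ha, hb, hadj, rfl, rfl, Or.inl hb'⟩)
      · -- a is right of b
        have ha' : a = (b.1 + 1, b.2) := by
          rw [Prod.ext_iff]; constructor <;> dsimp <;> omega
        exact pvEGsymm (Relation.EqvGen.rel _ _
          ((pvPairs_mem board opp _).2 ⟨b, a, hb, ha, pvAdj_symm hadj, rfl, rfl, Or.inl ha'⟩))
    | refl a => exact Relation.EqvGen.refl _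
    | symm a b _ ih => exact pvEGsymm (ih hq hp)
    | trans a b c h1 h2 ih1 ih2 =>
      rcases pvConn_stones board opp h1 with rfl | ⟨_, hsb⟩
      · exact ih2 hp hq
      · rcases pvConn_stones board opp h2 with rfl | _
        · exact ih1 hp hq
        · exact pvEGtrans (ih1 hp hsb) (ih2 hsb hq)

-- the union-find root test decides connectivity of stones
theorem pvRoot_iff_conn (board : List (List Int)) (opp : Int) {p q : Int × Int}
    (hp : pvStone board opp p) (hq : pvStone board opp q) :
    pvFind (pvPass1 board opp (board.length : Int)) (pvIdx (board.length : Int) p) =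
      pvFind (pvPass1 board opp (board.length : Int)) (pvIdx (board.length : Int) q) ↔
    pvConn board opp p q := by
  have hnn : (board.length : Int) * (board.length : Int)
      = ((board.length * board.length : Nat) : Int) := by push_cast; ring
  have hL : ∀ e ∈ pvPairs board opp (board.length : Int),
      0 ≤ e.1 ∧ e.1.toNat < board.length * board.length ∧
      0 ≤ e.2 ∧ e.2.toNat < board.length * board.length := by
    intro e he
    obtain ⟨p', q', hp', hq', _, h1, h2, _⟩ := (pvPairs_mem board opp e).1 he
    obtain ⟨a1, a2⟩ := pvIdx_range _ hp'.1
    obtain ⟨b1, b2⟩ := pvIdx_range _ hq'.1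
    rw [h1, h2]
    omega
  obtain ⟨hInv, hcls⟩ := pvUF_classes (board.length * board.length)
    (pvPairs board opp (board.length : Int)) hL
  have hpass : pvPass1 board opp (board.length : Int) =
      (pvPairs board opp (board.length : Int)).foldl (fun par e => pvUnion par e.1 e.2)
        (PySem.List.pyRange 0 ((board.length * board.length : Nat) : Int) 1) := by
    rw [pvPass1_eq, hnn]
  obtain ⟨a1, a2⟩ := pvIdx_range _ hp.1
  obtain ⟨b1, b2⟩ := pvIdx_range _ hq.1
  rw [hpass, hcls _ _ a1 (by omega) b1 (by omega), pvPairsEqv_iff_conn board opp hp hq]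

/- ---------- the DFS characterization ---------- -/

-- the DFS loop body, named for the proofs (identical to the lambda in pvGalLoop)
def pvGalStep (board : List (List Int)) (color : Int)
    (st : List (Int × Int) × PySem.Set (Int × Int) × PySem.Set (Int × Int)) (nb : Int × Int) :
    List (Int × Int) × PySem.Set (Int × Int) × PySem.Set (Int × Int) :=
  let v := pvCell board nb.1 nb.2
  if v = 0 then (st.1, st.2.1, PySem.Set.add st.2.2 nb)
  else if v = color ∧ nb ∉ st.2.1 then (st.1 ++ [nb], PySem.Set.add st.2.1 nb, st.2.2)
  else st

-- the inner `for nx, ny in neighbors(...)` fold of the DFS loop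
theorem pvGalInner_char (board : List (List Int)) (color : Int) :
    ∀ (nbrs : List (Int × Int)), nbrs.Nodup →
      ∀ (stack seen libs : List (Int × Int)),
      ∃ new : List (Int × Int),
        (nbrs.foldl (pvGalStep board color) (stack, seen, libs)).1 = stack ++ new ∧
        (nbrs.foldl (pvGalStep board color) (stack, seen, libs)).2.1 = seen ++ new ∧
        new.Nodup ∧
        (∀ p, p ∈ new ↔ p ∈ nbrs ∧ pvCell board p.1 p.2 = color ∧ pvCell board p.1 p.2 ≠ 0 ∧
          p ∉ seen) ∧
        (∀ e, e ∈ (nbrs.foldl (pvGalStep board color) (stack, seen, libs)).2.2 ↔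
          e ∈ libs ∨ (e ∈ nbrs ∧ pvCell board e.1 e.2 = 0)) ∧
        (libs.Nodup → ((nbrs.foldl (pvGalStep board color) (stack, seen, libs)).2.2).Nodup) := by
  intro nbrs
  induction nbrs with
  | nil =>
    intro _ stack seen libs
    exact ⟨[], by simp, by simp, List.nodup_nil, by simp, by simp, fun h => h⟩
  | cons nb rest ih =>
    intro hnd stack seen libs
    have hnbrest : nb ∉ rest := (List.nodup_cons.1 hnd).1
    have hndrest : rest.Nodup := (List.nodup_cons.1 hnd).2
    by_cases hv0 : pvCell board nb.1 nb.2 = 0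
    · have hstep : (nb :: rest).foldl (pvGalStep board color) (stack, seen, libs)
          = rest.foldl (pvGalStep board color) (stack, seen, PySem.Set.add libs nb) := by
        simp only [List.foldl_cons, pvGalStep, if_pos hv0]
      obtain ⟨new, h1, h2, hnodup, hmem, hlib, hlibnd⟩ :=
        ih hndrest stack seen (PySem.Set.add libs nb)
      refine ⟨new, by rw [hstep]; exact h1, by rw [hstep]; exact h2, hnodup, ?_, ?_, ?_⟩
      · intro p
        rw [hmem p]
        constructor
        · rintro ⟨ha, hb, hc, hd⟩; exact ⟨List.mem_cons_of_mem _ ha, hb, hc, hd⟩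
        · rintro ⟨ha, hb, hc, hd⟩
          rcases List.mem_cons.1 ha with rfl | ha'
          · exact absurd hv0 hc
          · exact ⟨ha', hb, hc, hd⟩
      · intro e
        rw [hstep, hlib e, PySem.Set.mem_add]
        constructor
        · rintro ((h | h) | ⟨ha, hb⟩)
          · exact Or.inl h
          · subst h; exact Or.inr ⟨List.mem_cons_self, hv0⟩
          · exact Or.inr ⟨List.mem_cons_of_mem _ ha, hb⟩
        · rintro (h | ⟨ha, hb⟩)
          · exact Or.inl (Or.inl h)
          · rcases List.mem_cons.1 ha with rfl | ha'
            · exact Or.inl (Or.inr rfl)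
            · exact Or.inr ⟨ha', hb⟩
      · intro hlnd
        rw [hstep]
        exact hlibnd (PySem.Set.nodup_add _ _ hlnd)
    · by_cases hpush : pvCell board nb.1 nb.2 = color ∧ nb ∉ seen
      · have hadd : PySem.Set.add seen nb = seen ++ [nb] := PySem.Set.add_of_not_mem hpush.2
        have hstep : (nb :: rest).foldl (pvGalStep board color) (stack, seen, libs)
            = rest.foldl (pvGalStep board color) (stack ++ [nb], seen ++ [nb], libs) := by
          simp only [List.foldl_cons, pvGalStep, if_neg hv0, if_pos hpush, hadd]
        obtain ⟨new, h1, h2, hnodup, hmem, hlib, hlibnd⟩ :=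
          ih hndrest (stack ++ [nb]) (seen ++ [nb]) libs
        have hnewnb : nb ∉ new := fun hc => hnbrest ((hmem nb).1 hc).1
        refine ⟨nb :: new, ?_, ?_, List.nodup_cons.2 ⟨hnewnb, hnodup⟩, ?_, ?_, ?_⟩
        · rw [hstep, h1]; simp
        · rw [hstep, h2]; simp
        · intro p
          rw [List.mem_cons, hmem p]
          constructor
          · rintro (rfl | ⟨ha, hb, hc, hd⟩)
            · exact ⟨List.mem_cons_self, hpush.1, hv0, hpush.2⟩
            · exact ⟨List.mem_cons_of_mem _ ha, hb, hc,
                fun hc' => hd (List.mem_append_left _ hc')⟩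
          · rintro ⟨ha, hb, hc, hd⟩
            rcases List.mem_cons.1 ha with rfl | ha'
            · exact Or.inl rfl
            · refine Or.inr ⟨ha', hb, hc, fun hc' => ?_⟩
              rcases List.mem_append.1 hc' with h | h
              · exact hd h
              · exact hnbrest ((List.mem_singleton.1 h) ▸ ha')
        · intro e
          rw [hstep, hlib e]
          constructor
          · rintro (h | ⟨ha, hb⟩)
            · exact Or.inl h
            · exact Or.inr ⟨List.mem_cons_of_mem _ ha, hb⟩
          · rintro (h | ⟨ha, hb⟩)
            · exact Or.inl h
            · rcases List.mem_cons.1 ha with rfl | ha'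
              · exact absurd hb hv0
              · exact Or.inr ⟨ha', hb⟩
        · intro hlnd
          rw [hstep]
          exact hlibnd hlnd
      · have hstep : (nb :: rest).foldl (pvGalStep board color) (stack, seen, libs)
            = rest.foldl (pvGalStep board color) (stack, seen, libs) := by
          simp only [List.foldl_cons, pvGalStep, if_neg hv0, if_neg hpush]
        obtain ⟨new, h1, h2, hnodup, hmem, hlib, hlibnd⟩ := ih hndrest stack seen libs
        refine ⟨new, by rw [hstep]; exact h1, by rw [hstep]; exact h2, hnodup, ?_, ?_, ?_⟩
        · intro p
          rw [hmem p]
          constructor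
          · rintro ⟨ha, hb, hc, hd⟩; exact ⟨List.mem_cons_of_mem _ ha, hb, hc, hd⟩
          · rintro ⟨ha, hb, hc, hd⟩
            rcases List.mem_cons.1 ha with rfl | ha'
            · exact absurd ⟨hb, hd⟩ hpush
            · exact ⟨ha', hb, hc, hd⟩
        · intro e
          rw [hstep, hlib e]
          constructor
          · rintro (h | ⟨ha, hb⟩)
            · exact Or.inl h
            · exact Or.inr ⟨List.mem_cons_of_mem _ ha, hb⟩
          · rintro (h | ⟨ha, hb⟩)
            · exact Or.inl h
            · rcases List.mem_cons.1 ha with rfl | ha'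
              · exact absurd hb hv0
              · exact Or.inr ⟨ha', hb⟩
        · intro hlnd
          rw [hstep]
          exact hlibnd hlnd

theorem pvGalLoop_zero (board : List (List Int)) (n color : Int)
    (stack seen stones libs) :
    pvGalLoop board n color 0 stack seen stones libs = (stones, libs) := rfl

theorem pvGalLoop_nil (board : List (List Int)) (n color : Int) (fuel : Nat)
    (seen stones libs) :
    pvGalLoop board n color (fuel + 1) [] seen stones libs = (stones, libs) := rfl

theorem pvGalLoop_cons (board : List (List Int)) (n color : Int) (fuel : Nat)
    (stack seen stones libs) (x y : Int) (hlast : stack.getLast? = some (x, y)) :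
    pvGalLoop board n color (fuel + 1) stack seen stones libs =
      pvGalLoop board n color fuel
        ((pvNeighbors n x y).foldl (pvGalStep board color) (stack.dropLast, seen, libs)).1
        ((pvNeighbors n x y).foldl (pvGalStep board color) (stack.dropLast, seen, libs)).2.1
        (stones ++ [(x, y)])
        ((pvNeighbors n x y).foldl (pvGalStep board color) (stack.dropLast, seen, libs)).2.2 := by
  rw [pvGalLoop, hlast]
  rfl

-- the DFS while-loop invariant
theorem pvGalLoop_inv (board : List (List Int)) (opp : Int) (s0 : Int × Int)
    (hopp : opp ≠ 0) (hs0 : pvStone board opp s0) :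
    ∀ (fuel : Nat) (stack seen stones libs : List (Int × Int)),
    seen.Nodup →
    (stones ++ stack).Perm seen →
    (∀ p ∈ seen, pvStone board opp p ∧ pvConn board opp s0 p) →
    s0 ∈ seen →
    (∀ p ∈ stones, ∀ q, pvAdj p q → pvGrid (board.length : Int) q →
      pvCell board q.1 q.2 = opp → q ∈ seen) →
    (∀ e, e ∈ libs ↔ (pvGrid (board.length : Int) e ∧ pvCell board e.1 e.2 = 0 ∧
      ∃ p ∈ stones, pvAdj p e)) →
    libs.Nodup →
    stack.length + (board.length * board.length - seen.length) ≤ fuel →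
    (∀ p, p ∈ (pvGalLoop board (board.length : Int) opp fuel stack seen stones libs).1 →
        pvStone board opp p ∧ pvConn board opp s0 p) ∧
    s0 ∈ (pvGalLoop board (board.length : Int) opp fuel stack seen stones libs).1 ∧
    (∀ p ∈ (pvGalLoop board (board.length : Int) opp fuel stack seen stones libs).1, ∀ q,
      pvAdj p q → pvGrid (board.length : Int) q → pvCell board q.1 q.2 = opp →
        q ∈ (pvGalLoop board (board.length : Int) opp fuel stack seen stones libs).1) ∧
    (∀ e, e ∈ (pvGalLoop board (board.length : Int) opp fuel stack seen stones libs).2 ↔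
      (pvGrid (board.length : Int) e ∧ pvCell board e.1 e.2 = 0 ∧
        ∃ p ∈ (pvGalLoop board (board.length : Int) opp fuel stack seen stones libs).1,
          pvAdj p e)) ∧
    (pvGalLoop board (board.length : Int) opp fuel stack seen stones libs).2.Nodup := by
  intro fuel
  induction fuel with
  | zero =>
    intro stack seen stones libs hnd hperm hseen hs0m hclose hlibs hlibnd hbound
    have hstacknil : stack = [] := List.length_eq_zero_iff.1 (by omega)
    subst hstacknil
    rw [pvGalLoop_zero]
    have hmem : ∀ p, p ∈ stones ↔ p ∈ seen := by
      intro p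
      rw [← hperm.mem_iff]
      simp
    exact ⟨fun p hp => hseen p ((hmem p).1 hp), (hmem s0).2 hs0m,
      fun p hp q h1 h2 h3 => (hmem q).2 (hclose p hp q h1 h2 h3),
      fun e => by rw [hlibs e], hlibnd⟩
  | succ fuel ih =>
    intro stack seen stones libs hnd hperm hseen hs0m hclose hlibs hlibnd hbound
    rcases hstack : stack.getLast? with _ | ⟨x, y⟩
    · have hstacknil : stack = [] := List.getLast?_eq_none_iff.1 hstack
      subst hstacknil
      rw [pvGalLoop_nil]
      have hmem : ∀ p, p ∈ stones ↔ p ∈ seen := by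
        intro p
        rw [← hperm.mem_iff]
        simp
      exact ⟨fun p hp => hseen p ((hmem p).1 hp), (hmem s0).2 hs0m,
        fun p hp q h1 h2 h3 => (hmem q).2 (hclose p hp q h1 h2 h3),
        fun e => by rw [hlibs e], hlibnd⟩
    · obtain ⟨pre, rfl⟩ := List.getLast?_eq_some_iff.1 hstack
      rw [pvGalLoop_cons board _ opp fuel _ seen stones libs x y hstack]
      have hdrop : (pre ++ [(x, y)]).dropLast = pre := List.dropLast_concat
      rw [hdrop]
      obtain ⟨new, h1, h2, hnewnd, hnewmem, hlib', hlibnd'⟩ :=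
        pvGalInner_char board opp (pvNeighbors (board.length : Int) x y)
          (pvNeighbors_nodup _ x y) pre seen libs
      rw [h1, h2]
      have hxyseen : (x, y) ∈ seen := by
        rw [← hperm.mem_iff]
        simp
      obtain ⟨hxystone, hxyconn⟩ := hseen (x, y) hxyseen
      have hxygrid : pvGrid (board.length : Int) (x, y) := hxystone.1
      have hnbrmem := pvMemNeighbors (board.length : Int) x y hxygrid
      -- facts about the new stones
      have hnewfacts : ∀ p ∈ new, pvStone board opp p ∧ pvConn board opp s0 p ∧ p ∉ seen := by
        intro p hp
        obtain ⟨hn1, hn2, _, hn4⟩ := (hnewmem p).1 hp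
        obtain ⟨hadj, hgrid⟩ := (hnbrmem p).1 hn1
        have hstonep : pvStone board opp p := ⟨hgrid, hn2⟩
        exact ⟨hstonep, pvEGtrans hxyconn (Relation.EqvGen.rel _ _ ⟨hxystone, hstonep, hadj⟩),
          hn4⟩
      have hnd' : (seen ++ new).Nodup := by
        rw [List.nodup_append]
        exact ⟨hnd, hnewnd, fun a ha b hb heq => ((hnewmem b).1 hb).2.2.2 (heq ▸ ha)⟩
      have hperm' : ((stones ++ [(x, y)]) ++ (pre ++ new)).Perm (seen ++ new) := by
        have e1 : (stones ++ [(x, y)]) ++ (pre ++ new) = ((stones ++ ([(x, y)] ++ pre)) ++ new) := by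
          simp [List.append_assoc]
        rw [e1]
        refine List.Perm.trans (List.Perm.append_right new ?_) (hperm.append_right new)
        exact List.Perm.append_left stones List.perm_append_comm
      have hseen' : ∀ p ∈ seen ++ new, pvStone board opp p ∧ pvConn board opp s0 p := by
        intro p hp
        rcases List.mem_append.1 hp with h | h
        · exact hseen p h
        · exact ⟨(hnewfacts p h).1, (hnewfacts p h).2.1⟩
      have hclose' : ∀ p ∈ stones ++ [(x, y)], ∀ q, pvAdj p q →
          pvGrid (board.length : Int) q → pvCell board q.1 q.2 = opp → q ∈ seen ++ new := by
        intro p hp q hq1 hq2 hq3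
        rcases List.mem_append.1 hp with h | h
        · exact List.mem_append_left _ (hclose p h q hq1 hq2 hq3)
        · have hpxy : p = (x, y) := List.mem_singleton.1 h
          subst hpxy
          by_cases hqseen : q ∈ seen
          · exact List.mem_append_left _ hqseen
          · refine List.mem_append_right _ ((hnewmem q).2 ?_)
            exact ⟨(hnbrmem q).2 ⟨hq1, hq2⟩, hq3, by rw [hq3]; exact hopp, hqseen⟩
      have hlibs' : ∀ e, e ∈ ((pvNeighbors (board.length : Int) x y).foldl
          (pvGalStep board opp) (pre, seen, libs)).2.2 ↔
          (pvGrid (board.length : Int) e ∧ pvCell board e.1 e.2 = 0 ∧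
            ∃ p ∈ stones ++ [(x, y)], pvAdj p e) := by
        intro e
        rw [hlib' e, hlibs e]
        constructor
        · rintro (⟨hg, hc, p, hp, hadj⟩ | ⟨hn, hc⟩)
          · exact ⟨hg, hc, p, List.mem_append_left _ hp, hadj⟩
          · obtain ⟨hadj, hgrid⟩ := (hnbrmem e).1 hn
            exact ⟨hgrid, hc, (x, y), List.mem_append_right _ (List.mem_singleton.2 rfl), hadj⟩
        · rintro ⟨hg, hc, p, hp, hadj⟩
          rcases List.mem_append.1 hp with h | h
          · exact Or.inl ⟨hg, hc, p, h, hadj⟩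
          · have hpxy : p = (x, y) := List.mem_singleton.1 h
            subst hpxy
            exact Or.inr ⟨(hnbrmem e).2 ⟨hadj, hg⟩, hc⟩
      have hseenlen : (seen ++ new).length ≤ board.length * board.length := by
        have := pvNodupSubsetLength (seen ++ new) (pvCells (board.length : Int)) hnd'
          (fun p hp => (pvCells_mem _ p).2 (hseen' p hp).1.1)
        rw [pvCells_length] at this
        simpa using this
      have hbound' : (pre ++ new).length +
          (board.length * board.length - (seen ++ new).length) ≤ fuel := by
        simp only [List.length_append] at hbound hseenlen ⊢
        simp only [List.length_append, List.length_cons, List.length_nil] at hbound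
        omega
      exact ih (pre ++ new) (seen ++ new) (stones ++ [(x, y)]) _ hnd' hperm' hseen' 
        (List.mem_append_left _ hs0m) hclose' hlibs' (hlibnd' hlibnd) hbound'

theorem pvGAL_char (board : List (List Int)) (opp : Int) (s : Int × Int)
    (hs : pvStone board opp s) (hopp : opp ≠ 0) :
    (∀ p, p ∈ (pvGAL board s.1 s.2).1 ↔ pvStone board opp p ∧ pvConn board opp s p) ∧
    (∀ e, e ∈ (pvGAL board s.1 s.2).2 ↔ pvIsLib board opp s e) ∧
    (pvGAL board s.1 s.2).2.Nodup := by
  have hGAL : pvGAL board s.1 s.2 = pvGalLoop board (board.length : Int) opp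
      (board.length * board.length + 1) [(s.1, s.2)] [(s.1, s.2)] [] [] := by
    unfold pvGAL
    rw [hs.2]
    rfl
  obtain ⟨C1, C2, C3, C4, C5⟩ := pvGalLoop_inv board opp s hopp hs
    (board.length * board.length + 1) [(s.1, s.2)] [(s.1, s.2)] [] []
    (List.nodup_singleton _)
    (by simp)
    (by
      intro p hp
      have : p = s := by
        rcases List.mem_singleton.1 hp with h
        rw [h]
      subst this
      exact ⟨hs, Relation.EqvGen.refl _⟩)
    (by simp)
    (by simp)
    (by simp)
    List.nodup_nil
    (by simp; omega)
  rw [hGAL]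
  have hstones : ∀ p, p ∈ (pvGalLoop board (board.length : Int) opp
      (board.length * board.length + 1) [(s.1, s.2)] [(s.1, s.2)] [] []).1 ↔
      pvStone board opp p ∧ pvConn board opp s p := by
    intro p
    constructor
    · exact C1 p
    · rintro ⟨hstonep, hconnp⟩
      have hiff : ∀ u v, pvConn board opp u v →
          (u ∈ (pvGalLoop board (board.length : Int) opp
            (board.length * board.length + 1) [(s.1, s.2)] [(s.1, s.2)] [] []).1 ↔
           v ∈ (pvGalLoop board (board.length : Int) opp
            (board.length * board.length + 1) [(s.1, s.2)] [(s.1, s.2)] [] []).1) := by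
        intro u v huv
        induction huv with
        | rel a b hab =>
          constructor
          · intro ha
            exact C3 a ha b hab.2.2 hab.2.1.1 hab.2.1.2
          · intro hb
            exact C3 b hb a (pvAdj_symm hab.2.2) hab.1.1 hab.1.2
        | refl a => exact Iff.rfl
        | symm a b _ ihab => exact ihab.symm
        | trans a b c _ _ ih1 ih2 => exact ih1.trans ih2
      exact (hiff s p hconnp).1 C2
  refine ⟨hstones, ?_, C5⟩
  intro e
  rw [C4 e]
  unfold pvIsLib
  constructor
  · rintro ⟨hg, hc, p, hp, hadj⟩
    obtain ⟨h1, h2⟩ := (hstones p).1 hp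
    exact ⟨hg, hc, p, h1, h2, hadj⟩
  · rintro ⟨hg, hc, p, h1, h2, hadj⟩
    exact ⟨hg, hc, p, (hstones p).2 ⟨h1, h2⟩, hadj⟩

/- ---------- first stones, and both mains ---------- -/

def pvRoot (board : List (List Int)) (opp : Int) (c : Int × Int) : Int :=
  pvFind (pvPass1 board opp (board.length : Int)) (pvIdx (board.length : Int) c)

def pvGridB (n : Int) (p : Int × Int) : Bool :=
  decide (0 ≤ p.1 ∧ p.1 < n ∧ 0 ≤ p.2 ∧ p.2 < n)

def pvStoneB (board : List (List Int)) (opp : Int) (p : Int × Int) : Bool :=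
  pvGridB (board.length : Int) p && decide (pvCell board p.1 p.2 = opp)

def pvScanLtB (p q : Int × Int) : Bool :=
  decide (p.2 < q.2 ∨ (p.2 = q.2 ∧ p.1 < q.1))

theorem pvGridB_iff (n : Int) (p : Int × Int) : pvGridB n p = true ↔ pvGrid n p := by
  simp [pvGridB, pvGrid]

theorem pvStoneB_iff (board : List (List Int)) (opp : Int) (p : Int × Int) :
    pvStoneB board opp p = true ↔ pvStone board opp p := by
  simp [pvStoneB, pvStone, pvGridB_iff, pvGrid]

theorem pvScanLtB_iff (p q : Int × Int) : pvScanLtB p q = true ↔ pvScanLt p q := by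
  simp [pvScanLtB, pvScanLt]

def pvFirstB (board : List (List Int)) (opp : Int) (c : Int × Int) : Bool :=
  pvStoneB board opp c &&
    !((pvCells (board.length : Int)).any (fun c' =>
        pvScanLtB c' c && pvStoneB board opp c' &&
          (pvRoot board opp c' == pvRoot board opp c)))

def pvFirsts (board : List (List Int)) (opp : Int) : List (Int × Int) :=
  (pvCells (board.length : Int)).filter (pvFirstB board opp)

theorem pvRootB_iff_conn (board : List (List Int)) (opp : Int) {p q : Int × Int}
    (hp : pvStone board opp p) (hq : pvStone board opp q) :
    pvRoot board opp p = pvRoot board opp q ↔ pvConn board opp p q :=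
  pvRoot_iff_conn board opp hp hq

theorem pvFirstB_iff (board : List (List Int)) (opp : Int) (c : Int × Int) :
    pvFirstB board opp c = true ↔
      pvStone board opp c ∧
        ∀ c', pvStone board opp c' → pvScanLt c' c → ¬ pvConn board opp c' c := by
  unfold pvFirstB
  rw [Bool.and_eq_true, pvStoneB_iff, Bool.not_eq_true', List.any_eq_false]
  constructor
  · rintro ⟨h1, h2⟩
    refine ⟨h1, fun c' hc' hlt hconn => ?_⟩
    have hmem : c' ∈ pvCells (board.length : Int) := (pvCells_mem _ c').2 hc'.1
    exact h2 c' hmem (by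
      rw [Bool.and_eq_true, Bool.and_eq_true]
      exact ⟨⟨(pvScanLtB_iff c' c).2 hlt, (pvStoneB_iff board opp c').2 hc'⟩,
        beq_iff_eq.2 ((pvRootB_iff_conn board opp hc' h1).2 hconn)⟩)
  · rintro ⟨h1, h2⟩
    refine ⟨h1, fun c' hmem => ?_⟩
    by_cases hlt : pvScanLt c' c
    · by_cases hst : pvStone board opp c'
      · have : ¬ pvConn board opp c' c := h2 c' hst hlt
        have hne : pvRoot board opp c' ≠ pvRoot board opp c :=
          fun hc => this ((pvRootB_iff_conn board opp hst h1).1 hc)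
        simp [hne]
      · simp [(by rw [← Bool.not_eq_true, pvStoneB_iff]; exact hst :
          pvStoneB board opp c' = false)]
    · simp [(by rw [← Bool.not_eq_true, pvScanLtB_iff]; exact hlt :
        pvScanLtB c' c = false)]

-- every stone is connected to a unique first stone, no later than itself
theorem pvFirst_exists (board : List (List Int)) (opp : Int) (c : Int × Int)
    (hc : pvStone board opp c) :
    ∃ f, pvFirstB board opp f = true ∧ pvConn board opp f c ∧
      (pvScanLt f c ∨ f = c) := by
  have H : ∀ m : Nat, ∀ c : Int × Int, pvStone board opp c →
      (pvIdx (board.length : Int) c).toNat ≤ m →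
      ∃ f, pvFirstB board opp f = true ∧ pvConn board opp f c ∧
        (pvScanLt f c ∨ f = c) := by
    intro m
    induction m using Nat.strong_induction_on with
    | _ m ih =>
      intro c hc hm
      by_cases hfb : pvFirstB board opp c = true
      · exact ⟨c, hfb, Relation.EqvGen.refl c, Or.inr rfl⟩
      · rw [pvFirstB_iff] at hfb
        push_neg at hfb
        obtain ⟨c', hc'stone, hc'lt, hc'conn⟩ := hfb hc
        have hidxlt : pvIdx (board.length : Int) c' < pvIdx (board.length : Int) c := by
          obtain ⟨g1, g2, g3, g4⟩ := hc'stone.1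
          obtain ⟨g5, g6, g7, g8⟩ := hc.1
          unfold pvIdx
          unfold pvScanLt at hc'lt
          rcases hc'lt with h | ⟨h, h'⟩
          · nlinarith
          · nlinarith
        have hidx0 : 0 ≤ pvIdx (board.length : Int) c' := (pvIdx_range _ hc'stone.1).1
        have hm' : (pvIdx (board.length : Int) c').toNat < m := by
          have h0c : 0 ≤ pvIdx (board.length : Int) c := (pvIdx_range _ hc.1).1
          omega
        obtain ⟨f, hf1, hf2, hf3⟩ := ih _ hm' c' hc'stone le_rfl
        exact ⟨f, hf1, pvEGtrans hf2 hc'conn, by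
          rcases hf3 with h | rfl
          · left; unfold pvScanLt at h hc'lt ⊢; omega
          · exact Or.inl hc'lt⟩
  exact H (pvIdx (board.length : Int) c).toNat c hc le_rfl

theorem pvFirsts_prefix_roots_nodup (board : List (List Int)) (opp : Int)
    (P : List (Int × Int)) (hsub : P.Sublist (pvCells (board.length : Int))) :
    ((P.filter (pvFirstB board opp)).map (pvRoot board opp)).Nodup := by
  rw [List.Nodup, List.pairwise_map]
  have hpw : (P.filter (pvFirstB board opp)).Pairwise pvScanLt :=
    ((pvCells_pairwise (board.length : Int)).sublist hsub).filter _
  refine List.Pairwise.imp_of_mem ?_ hpw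
  intro a b ha hb hab
  have ha' := (pvFirstB_iff board opp a).1 (List.of_mem_filter ha)
  have hb' := (pvFirstB_iff board opp b).1 (List.of_mem_filter hb)
  intro heq
  exact hb'.2 a ha'.1 hab ((pvRootB_iff_conn board opp ha'.1 hb'.1).1 heq)

/- ---------- the two candidate folds agree pointwise ---------- -/

theorem pvCandFold (board : List (List Int)) (S T : List (PySem.Set (Int × Int)))
    (hlen : S.length = T.length)
    (h : ∀ k : Nat, (hk : k < S.length) → (htk : k < T.length) →
      S[k].Nodup ∧ T[k].Nodup ∧ (∀ e, e ∈ S[k] ↔ e ∈ T[k]) ∧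
        (∀ e ∈ S[k], pvCell board e.1 e.2 = 0)) (cand : PySem.Set (Int × Int)) :
    S.foldl (fun cand s =>
        if PySem.Set.len s = 1 then
          match s.head? with
          | some e => if pvCell board e.1 e.2 = 0 then PySem.Set.add cand e else cand
          | none => cand
        else cand) cand
      = T.foldl (fun cand s =>
        if PySem.Set.len s = 1 then
          match s.head? with
          | some e => PySem.Set.add cand e
          | none => cand
        else cand) cand := by
  induction S generalizing T cand with
  | nil =>
    have : T = [] := List.length_eq_zero_iff.1 (by simpa using hlen.symm)
    subst this
    rfl
  | cons s S' ihS =>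
    rcases T with _ | ⟨t, T'⟩
    · simp at hlen
    obtain ⟨hs_nd, ht_nd, hmem, hcell⟩ := h 0 (by simp) (by simp)
    have hlen' : S'.length = T'.length := by simpa using hlen
    have hshift : ∀ k : Nat, (hk : k < S'.length) → (htk : k < T'.length) →
        S'[k].Nodup ∧ T'[k].Nodup ∧ (∀ e, e ∈ S'[k] ↔ e ∈ T'[k]) ∧
          (∀ e ∈ S'[k], pvCell board e.1 e.2 = 0) := by
      intro k hk htk
      simpa using h (k + 1) (by simpa using hk) (by simpa using htk)
    have hll : s.length = t.length := pvNodupSameMemLength s t (by simpa using hs_nd)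
      (by simpa using ht_nd) (fun x => by simpa using hmem x)
    simp only [List.foldl_cons]
    by_cases h1 : PySem.Set.len s = 1
    · have hs1 : s.length = 1 := by
        have : (s.length : Int) = 1 := h1
        exact_mod_cast this
      have ht1len : PySem.Set.len t = 1 := by
        show (t.length : Int) = 1
        rw [← hll]
        exact_mod_cast hs1
      obtain ⟨e, he⟩ := List.length_eq_one_iff.1 hs1
      have ht1 : t = [e] := by
        apply pvNodupSingleton t e (by simpa using ht_nd)
        intro x
        rw [← (by simpa using hmem x : x ∈ s ↔ x ∈ t), he, List.mem_singleton]
      have hcelle : pvCell board e.1 e.2 = 0 := by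
        apply hcell
        simp [he]
      rw [if_pos h1, if_pos ht1len, he, ht1]
      simp only [List.head?_cons, hcelle, if_pos rfl]
      exact ihS T' hlen' hshift _
    · have ht1len : ¬ PySem.Set.len t = 1 := by
        show ¬ (t.length : Int) = 1
        rw [← hll]
        exact h1
      rw [if_neg h1, if_neg ht1len]
      exact ihS T' hlen' hshift _

/- ---------- A's main loop ---------- -/

def pvAStep (board : List (List Int)) (cand : PySem.Set (Int × Int))
    (s : PySem.Set (Int × Int)) : PySem.Set (Int × Int) :=
  if PySem.Set.len s = 1 then
    match s.head? with
    | some e => if pvCell board e.1 e.2 = 0 then PySem.Set.add cand e else cand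
    | none => cand
  else cand

def pvABody (board : List (List Int)) (opp : Int)
    (st : PySem.Set (Int × Int) × PySem.Set (Int × Int)) (c : Int × Int) :
    PySem.Set (Int × Int) × PySem.Set (Int × Int) :=
  if pvCell board c.1 c.2 ≠ opp then st
  else if c ∈ st.2 then st
  else
    let gl := pvGAL board c.1 c.2
    let seen' := gl.1.foldl (fun s p => PySem.Set.add s p) st.2
    if PySem.Set.len gl.2 = 1 then
      match gl.2.head? with
      | some e => if pvCell board e.1 e.2 = 0 then (PySem.Set.add st.1 e, seen') else (st.1, seen')
      | none => (st.1, seen')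
    else (st.1, seen')

theorem pvA_inv (board : List (List Int)) (opp : Int) (hopp0 : opp ≠ 0) :
    ∀ (rest P : List (Int × Int)) (st : PySem.Set (Int × Int) × PySem.Set (Int × Int)),
    pvCells (board.length : Int) = P ++ rest →
    (∀ p, p ∈ st.2 ↔ ∃ c ∈ P, pvStone board opp c ∧ pvStone board opp p ∧
      pvConn board opp c p) →
    st.1 = ((P.filter (pvFirstB board opp)).map (fun c => (pvGAL board c.1 c.2).2)).foldl
      (pvAStep board) [] →
    (rest.foldl (pvABody board opp) st).1 =
      (((P ++ rest).filter (pvFirstB board opp)).map (fun c => (pvGAL board c.1 c.2).2)).foldl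
        (pvAStep board) [] ∧
    (∀ p, p ∈ (rest.foldl (pvABody board opp) st).2 ↔ ∃ c ∈ P ++ rest,
      pvStone board opp c ∧ pvStone board opp p ∧ pvConn board opp c p) := by
  intro rest
  induction rest with
  | nil =>
    intro P st hdec hseen hcand
    simp only [List.foldl_nil, List.append_nil]
    exact ⟨hcand, hseen⟩
  | cons c rest' ih =>
    intro P st hdec hseen hcand
    have hdec' : pvCells (board.length : Int) = (P ++ [c]) ++ rest' := by
      rw [hdec, List.append_assoc]; rfl
    have hcgrid : pvGrid (board.length : Int) c := by
      apply (pvCells_mem _ c).1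
      rw [hdec]
      exact List.mem_append_right _ List.mem_cons_self
    have hprefix := pvPrefix_mem (board.length : Int) P rest' c hdec
    rw [List.foldl_cons]
    by_cases hcell : pvCell board c.1 c.2 = opp
    · have hstonec : pvStone board opp c := ⟨hcgrid, hcell⟩
      by_cases hcseen : c ∈ st.2
      · -- already seen: skip, and c is not a first stone
        have hbody : pvABody board opp st c = st := by
          unfold pvABody
          rw [if_neg (by simpa using hcell), if_pos hcseen]
        obtain ⟨c', hc'P, hc'stone, _, hc'conn⟩ := (hseen c).1 hcseen
        have hfirstfalse : pvFirstB board opp c ≠ true := by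
          intro hh
          obtain ⟨_, hall⟩ := (pvFirstB_iff board opp c).1 hh
          exact hall c' hc'stone ((hprefix c').1 hc'P).2 hc'conn
        have hfil : (P ++ [c]).filter (pvFirstB board opp) =
            P.filter (pvFirstB board opp) := by
          rw [List.filter_append]
          simp [Bool.eq_false_iff.2 hfirstfalse]
        have hseen' : ∀ p, p ∈ st.2 ↔ ∃ c'' ∈ P ++ [c],
            pvStone board opp c'' ∧ pvStone board opp p ∧ pvConn board opp c'' p := by
          intro p
          rw [hseen p]
          constructor
          · rintro ⟨d, hd, h1, h2, h3⟩
            exact ⟨d, List.mem_append_left _ hd, h1, h2, h3⟩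
          · rintro ⟨d, hd, h1, h2, h3⟩
            rcases List.mem_append.1 hd with hd' | hd'
            · exact ⟨d, hd', h1, h2, h3⟩
            · have : d = c := List.mem_singleton.1 hd'
              subst this
              exact ⟨c', hc'P, hc'stone, h2, pvEGtrans hc'conn h3⟩
        obtain ⟨r1, r2⟩ := ih (P ++ [c]) st hdec' hseen' (by rw [hfil]; exact hcand)
        rw [hbody]
        refine ⟨by rw [r1, List.append_assoc]; rfl, fun p => by
          rw [r2 p, List.append_assoc]; rfl⟩
      · -- a new group: c is its first stone
        have hfirst : pvFirstB board opp c = true := by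
          rw [pvFirstB_iff]
          refine ⟨hstonec, fun c' hst hlt hconn => hcseen ?_⟩
          exact (hseen c).2 ⟨c', (hprefix c').2 ⟨hst.1, hlt⟩, hst, hstonec,
            hconn⟩
        have hbody : pvABody board opp st c =
            (pvAStep board st.1 (pvGAL board c.1 c.2).2,
             PySem.Set.update st.2 (pvGAL board c.1 c.2).1) := by
          unfold pvABody pvAStep
          rw [if_neg (by simpa using hcell), if_neg hcseen]
          by_cases hl : PySem.Set.len (pvGAL board c.1 c.2).2 = 1
          · rw [if_pos hl, if_pos hl]
            rcases hhead : (pvGAL board c.1 c.2).2.head? with _ | e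
            · rfl
            · show (if pvCell board e.1 e.2 = 0 then
                  (PySem.Set.add st.1 e,
                   List.foldl (fun s p => PySem.Set.add s p) st.2 (pvGAL board c.1 c.2).1)
                else (st.1,
                  List.foldl (fun s p => PySem.Set.add s p) st.2 (pvGAL board c.1 c.2).1)) =
                ((if pvCell board e.1 e.2 = 0 then PySem.Set.add st.1 e else st.1),
                  PySem.Set.update st.2 (pvGAL board c.1 c.2).1)
              split_ifs <;> rfl
          · rw [if_neg hl, if_neg hl]
            rfl
        obtain ⟨hstones, hlibs, hlibnd⟩ := pvGAL_char board opp c hstonec hopp0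
        have hfil : (P ++ [c]).filter (pvFirstB board opp) =
            P.filter (pvFirstB board opp) ++ [c] := by
          rw [List.filter_append]
          simp [hfirst]
        have hseen' : ∀ p, p ∈ (pvABody board opp st c).2 ↔ ∃ c'' ∈ P ++ [c],
            pvStone board opp c'' ∧ pvStone board opp p ∧ pvConn board opp c'' p := by
          intro p
          rw [hbody]
          show p ∈ PySem.Set.update st.2 (pvGAL board c.1 c.2).1 ↔ _
          rw [PySem.Set.mem_update, hseen p, hstones p]
          constructor
          · rintro (⟨d, hd, h1, h2, h3⟩ | ⟨h1, h2⟩)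
            · exact ⟨d, List.mem_append_left _ hd, h1, h2, h3⟩
            · exact ⟨c, List.mem_append_right _ (List.mem_singleton.2 rfl), hstonec, h1, h2⟩
          · rintro ⟨d, hd, h1, h2, h3⟩
            rcases List.mem_append.1 hd with hd' | hd'
            · exact Or.inl ⟨d, hd', h1, h2, h3⟩
            · have : d = c := List.mem_singleton.1 hd'
              subst this
              exact Or.inr ⟨h2, h3⟩
        have hcand' : (pvABody board opp st c).1 =
            (((P ++ [c]).filter (pvFirstB board opp)).map
              (fun c => (pvGAL board c.1 c.2).2)).foldl (pvAStep board) [] := by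
          rw [hbody, hfil, List.map_append, List.foldl_append, ← hcand]
          rfl
        obtain ⟨r1, r2⟩ := ih (P ++ [c]) (pvABody board opp st c) hdec' hseen' hcand'
        refine ⟨by rw [r1, List.append_assoc]; rfl, fun p => by
          rw [r2 p, List.append_assoc]; rfl⟩
    · -- not an opponent stone: skip
      have hbody : pvABody board opp st c = st := by
        unfold pvABody
        rw [if_pos (by simpa using hcell)]
      have hfirstfalse : pvFirstB board opp c ≠ true := by
        intro hh
        exact hcell ((pvFirstB_iff board opp c).1 hh).1.2
      have hfil : (P ++ [c]).filter (pvFirstB board opp) = P.filter (pvFirstB board opp) := by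
        rw [List.filter_append]
        simp [Bool.eq_false_iff.2 hfirstfalse]
      have hseen' : ∀ p, p ∈ st.2 ↔ ∃ c'' ∈ P ++ [c],
          pvStone board opp c'' ∧ pvStone board opp p ∧ pvConn board opp c'' p := by
        intro p
        rw [hseen p]
        constructor
        · rintro ⟨d, hd, h1, h2, h3⟩
          exact ⟨d, List.mem_append_left _ hd, h1, h2, h3⟩
        · rintro ⟨d, hd, h1, h2, h3⟩
          rcases List.mem_append.1 hd with hd' | hd'
          · exact ⟨d, hd', h1, h2, h3⟩
          · have : d = c := List.mem_singleton.1 hd'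
            subst this
            exact absurd h1.2 hcell
      obtain ⟨r1, r2⟩ := ih (P ++ [c]) st hdec' hseen' (by rw [hfil]; exact hcand)
      rw [hbody]
      refine ⟨by rw [r1, List.append_assoc]; rfl, fun p => by
        rw [r2 p, List.append_assoc]; rfl⟩

theorem pvA_char (board : List (List Int)) (player opp : Int)
    (hopp : opp = if player = 1 then 2 else 1) :
    capture_candidates board player =
      ((pvFirsts board opp).map (fun c => (pvGAL board c.1 c.2).2)).foldl
        (fun cand s =>
          if PySem.Set.len s = 1 then
            match s.head? with
            | some e => if pvCell board e.1 e.2 = 0 then PySem.Set.add cand e else cand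
            | none => cand
          else cand) [] := by
  subst hopp
  have hopp0 : (if player = 1 then 2 else 1 : Int) ≠ 0 := by split <;> norm_num
  obtain ⟨hc, _⟩ := pvA_inv board (if player = 1 then 2 else 1) hopp0
    (pvCells (board.length : Int)) [] ([], []) (by simp) (by simp) rfl
  calc capture_candidates board player
      = ((pvCells (board.length : Int)).foldl
          (pvABody board (if player = 1 then 2 else 1)) ([], [])).1 :=
        congrArg Prod.fst (pvFoldlNested (PySem.List.pyRange 0 (board.length : Int) 1)
          (PySem.List.pyRange 0 (board.length : Int) 1)
          (pvABody board (if player = 1 then 2 else 1)) ([], []))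
    _ = _ := by simp only [List.nil_append] at hc; exact hc

/- ---------- B's passes ---------- -/

def pvPass2 (board : List (List Int)) (opp n : Int) (parent : List Int) :
    PySem.Dict Int (PySem.Set (Int × Int)) :=
  (PySem.List.pyRange 0 n 1).foldl (fun libs y =>
    (PySem.List.pyRange 0 n 1).foldl (fun (libs : PySem.Dict Int (PySem.Set (Int × Int))) x =>
      if pvCell board x y ≠ opp then libs
      else
        let r := pvFind parent (y * n + x)
        let libs := if libs.contains r then libs else libs.insert r []
        [(x - 1, y), (x + 1, y), (x, y - 1), (x, y + 1)].foldl (fun libs nb =>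
          if 0 ≤ nb.1 ∧ nb.1 < n ∧ 0 ≤ nb.2 ∧ nb.2 < n ∧ pvCell board nb.1 nb.2 = 0
          then PySem.Dict.modify libs r [] (fun s => PySem.Set.add s nb) else libs) libs) libs)
    PySem.Dict.empty

theorem pvAlt_eq (board : List (List Int)) (player opp : Int)
    (hopp : opp = if player = 1 then 2 else 1) :
    capture_candidates_alt board player =
      (PySem.Dict.values
          (pvPass2 board opp (board.length : Int) (pvPass1 board opp (board.length : Int)))).foldl
        (fun cand s =>
          if PySem.Set.len s = 1 then
            match s.head? with
            | some e => PySem.Set.add cand e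
            | none => cand
          else cand) [] := by
  subst hopp
  rfl

def pvPartialLib (board : List (List Int)) (opp : Int) (f : Int × Int)
    (P : List (Int × Int)) (e : Int × Int) : Prop :=
  pvGrid (board.length : Int) e ∧ pvCell board e.1 e.2 = 0 ∧
    ∃ p ∈ P, pvStone board opp p ∧ pvConn board opp f p ∧ pvAdj p e

def pvBBody (board : List (List Int)) (opp n : Int) (parent : List Int)
    (libs : PySem.Dict Int (PySem.Set (Int × Int))) (c : Int × Int) :
    PySem.Dict Int (PySem.Set (Int × Int)) :=
  if pvCell board c.1 c.2 ≠ opp then libs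
  else
    let r := pvFind parent (c.2 * n + c.1)
    let libs := if libs.contains r then libs else libs.insert r []
    [(c.1 - 1, c.2), (c.1 + 1, c.2), (c.1, c.2 - 1), (c.1, c.2 + 1)].foldl (fun libs nb =>
      if 0 ≤ nb.1 ∧ nb.1 < n ∧ 0 ≤ nb.2 ∧ nb.2 < n ∧ pvCell board nb.1 nb.2 = 0
      then PySem.Dict.modify libs r [] (fun s => PySem.Set.add s nb) else libs) libs

theorem pvMem4 (c e : Int × Int) :
    e ∈ [(c.1 - 1, c.2), (c.1 + 1, c.2), (c.1, c.2 - 1), (c.1, c.2 + 1)] ↔ pvAdj c e := by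
  rcases e with ⟨a, b⟩
  simp only [List.mem_cons, List.mem_singleton, List.not_mem_nil, or_false, Prod.mk.injEq,
    pvAdj]
  omega

-- modifying an existing key of a dict in first-stone shape updates just that entry
theorem pvModifyItems (board : List (List Int)) (opp : Int) (F : List (Int × Int))
    (val : Int × Int → PySem.Set (Int × Int)) (r : Int) (ck : Int × Int)
    (g : PySem.Set (Int × Int) → PySem.Set (Int × Int))
    (hnd : (F.map (pvRoot board opp)).Nodup) (hck : ck ∈ F) (hr : pvRoot board opp ck = r) :
    (PySem.Dict.mk (F.map (fun f => (pvRoot board opp f, val f)))).modify r [] g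
      = PySem.Dict.mk (F.map (fun f =>
          (pvRoot board opp f, if pvRoot board opp f = r then g (val ck) else val f))) := by
  have hkeys : (PySem.Dict.mk (F.map (fun f => (pvRoot board opp f, val f)))).keys
      = F.map (pvRoot board opp) := by
    show List.map _ _ = _
    rw [List.map_map]
    rfl
  have hkeysnd : (PySem.Dict.mk (F.map (fun f => (pvRoot board opp f, val f)))).keys.Nodup := by
    rw [hkeys]; exact hnd
  have hitem : (r, val ck) ∈ (PySem.Dict.mk (F.map (fun f =>
      (pvRoot board opp f, val f)))).items := by
    show _ ∈ List.map _ _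
    exact List.mem_map.2 ⟨ck, hck, by rw [hr]⟩
  have hgetD : (PySem.Dict.mk (F.map (fun f => (pvRoot board opp f, val f)))).getD r []
      = val ck := PySem.Dict.getD_of_mem_items _ hitem hkeysnd []
  have hcont : (PySem.Dict.mk (F.map (fun f => (pvRoot board opp f, val f)))).contains r
      = true := by
    rw [PySem.Dict.contains_iff_mem_keys, hkeys]
    exact List.mem_map.2 ⟨ck, hck, hr⟩
  unfold PySem.Dict.modify
  rw [hgetD]
  apply PySem.Dict.ext
  rw [PySem.Dict.items_insert_of_contains _ _ hcont]
  show List.map _ (List.map _ _) = List.map _ _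
  rw [List.map_map]
  apply List.map_congr_left
  intro f hf
  by_cases hfr : pvRoot board opp f = r
  · simp [Function.comp, hfr]
  · simp [Function.comp, hfr]

-- the four-neighbor loop over a dict in first-stone shape
theorem pvInnerFold (board : List (List Int)) (opp n : Int) :
    ∀ (L : List (Int × Int)) (F : List (Int × Int))
      (val : Int × Int → PySem.Set (Int × Int)) (r : Int) (ck : Int × Int),
      (F.map (pvRoot board opp)).Nodup → ck ∈ F → pvRoot board opp ck = r →
      (∀ f ∈ F, pvRoot board opp f = r → f = ck) →
      L.foldl (fun libs nb =>
          if 0 ≤ nb.1 ∧ nb.1 < n ∧ 0 ≤ nb.2 ∧ nb.2 < n ∧ pvCell board nb.1 nb.2 = 0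
          then PySem.Dict.modify libs r [] (fun s => PySem.Set.add s nb) else libs)
        (PySem.Dict.mk (F.map (fun f => (pvRoot board opp f, val f))))
      = PySem.Dict.mk (F.map (fun f => (pvRoot board opp f,
          if pvRoot board opp f = r then
            PySem.Set.update (val ck) (L.filter (fun nb =>
              decide (0 ≤ nb.1 ∧ nb.1 < n ∧ 0 ≤ nb.2 ∧ nb.2 < n ∧
                pvCell board nb.1 nb.2 = 0)))
          else val f))) := by
  intro L
  induction L with
  | nil =>
    intro F val r ck hnd hck hr hinj
    simp only [List.foldl_nil, List.filter_nil]
    congr 1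
    apply List.map_congr_left
    intro f hf
    by_cases hfr : pvRoot board opp f = r
    · rw [if_pos hfr, hinj f hf hfr]
      rfl
    · rw [if_neg hfr]
  | cons nb L' ih =>
    intro F val r ck hnd hck hr hinj
    rw [List.foldl_cons]
    by_cases hq : 0 ≤ nb.1 ∧ nb.1 < n ∧ 0 ≤ nb.2 ∧ nb.2 < n ∧ pvCell board nb.1 nb.2 = 0
    · rw [if_pos hq,
        pvModifyItems board opp F val r ck (fun s => PySem.Set.add s nb) hnd hck hr,
        ih F _ r ck hnd hck hr hinj]
      congr 1
      apply List.map_congr_left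
      intro f hf
      by_cases hfr : pvRoot board opp f = r
      · simp only [if_pos hfr, if_pos hr]
        have hfc : List.filter (fun nb => decide (0 ≤ nb.1 ∧ nb.1 < n ∧ 0 ≤ nb.2 ∧ nb.2 < n ∧
            pvCell board nb.1 nb.2 = 0)) (nb :: L') = nb :: List.filter _ L' :=
          List.filter_cons_of_pos (by simp only [decide_eq_true_eq]; exact hq)
        rw [hfc, PySem.Set.update_cons]
      · simp only [if_neg hfr]
    · rw [if_neg hq, ih F val r ck hnd hck hr hinj]
      congr 1
      apply List.map_congr_left
      intro f hf
      by_cases hfr : pvRoot board opp f = r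
      · simp only [if_pos hfr]
        have hfc : List.filter (fun nb => decide (0 ≤ nb.1 ∧ nb.1 < n ∧ 0 ≤ nb.2 ∧ nb.2 < n ∧
            pvCell board nb.1 nb.2 = 0)) (nb :: L') = List.filter _ L' :=
          List.filter_cons_of_neg (by simp only [decide_eq_true_eq]; exact hq)
        rw [hfc]
      · simp only [if_neg hfr]

theorem pvLstMem (board : List (List Int)) (c e : Int × Int) :
    e ∈ ([(c.1 - 1, c.2), (c.1 + 1, c.2), (c.1, c.2 - 1), (c.1, c.2 + 1)].filter
      (fun nb => decide (0 ≤ nb.1 ∧ nb.1 < (board.length : Int) ∧ 0 ≤ nb.2 ∧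
        nb.2 < (board.length : Int) ∧ pvCell board nb.1 nb.2 = 0))) ↔
    pvAdj c e ∧ pvGrid (board.length : Int) e ∧ pvCell board e.1 e.2 = 0 := by
  rw [List.mem_filter, pvMem4, decide_eq_true_eq]
  unfold pvGrid
  tauto

theorem pvPartialLib_skip (board : List (List Int)) (opp : Int) (f c : Int × Int)
    (P : List (Int × Int))
    (h : ¬ (pvStone board opp c ∧ pvConn board opp f c)) (e : Int × Int) :
    pvPartialLib board opp f (P ++ [c]) e ↔ pvPartialLib board opp f P e := by
  unfold pvPartialLib
  constructor
  · rintro ⟨hg, hc, p, hp, h1, h2, h3⟩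
    rcases List.mem_append.1 hp with hp' | hp'
    · exact ⟨hg, hc, p, hp', h1, h2, h3⟩
    · have : p = c := List.mem_singleton.1 hp'
      subst this
      exact absurd ⟨h1, h2⟩ h
  · rintro ⟨hg, hc, p, hp, h1, h2, h3⟩
    exact ⟨hg, hc, p, List.mem_append_left _ hp, h1, h2, h3⟩

theorem pvPartialLib_snoc (board : List (List Int)) (opp : Int) (f c : Int × Int)
    (P : List (Int × Int)) (hc : pvStone board opp c) (hconn : pvConn board opp f c)
    (e : Int × Int) :
    pvPartialLib board opp f (P ++ [c]) e ↔ pvPartialLib board opp f P e ∨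
      (pvGrid (board.length : Int) e ∧ pvCell board e.1 e.2 = 0 ∧ pvAdj c e) := by
  unfold pvPartialLib
  constructor
  · rintro ⟨hg, hcc, p, hp, h1, h2, h3⟩
    rcases List.mem_append.1 hp with hp' | hp'
    · exact Or.inl ⟨hg, hcc, p, hp', h1, h2, h3⟩
    · have : p = c := List.mem_singleton.1 hp'
      subst this
      exact Or.inr ⟨hg, hcc, h3⟩
  · rintro (⟨hg, hcc, p, hp, h1, h2, h3⟩ | ⟨hg, hcc, h3⟩)
    · exact ⟨hg, hcc, p, List.mem_append_left _ hp, h1, h2, h3⟩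
    · exact ⟨hg, hcc, c, List.mem_append_right _ (List.mem_singleton.2 rfl), hc, hconn, h3⟩

-- B's pass-2 loop invariant
theorem pvB_inv (board : List (List Int)) (opp : Int) (hopp0 : opp ≠ 0) :
    ∀ (rest P : List (Int × Int)) (val : (Int × Int) → PySem.Set (Int × Int)),
    pvCells (board.length : Int) = P ++ rest →
    (∀ f ∈ P.filter (pvFirstB board opp), (val f).Nodup ∧
      ∀ e, e ∈ val f ↔ pvPartialLib board opp f P e) →
    ∃ val' : (Int × Int) → PySem.Set (Int × Int),
      rest.foldl (pvBBody board opp (board.length : Int)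
          (pvPass1 board opp (board.length : Int)))
        (PySem.Dict.mk ((P.filter (pvFirstB board opp)).map
          (fun f => (pvRoot board opp f, val f))))
      = PySem.Dict.mk (((P ++ rest).filter (pvFirstB board opp)).map
          (fun f => (pvRoot board opp f, val' f))) ∧
      (∀ f ∈ (P ++ rest).filter (pvFirstB board opp), (val' f).Nodup ∧
        ∀ e, e ∈ val' f ↔ pvPartialLib board opp f (P ++ rest) e) := by
  intro rest
  induction rest with
  | nil =>
    intro P val hdec hchar
    exact ⟨val, by simp, by simpa using hchar⟩
  | cons c rest' ih =>
    intro P val hdec hchar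
    have hdec' : pvCells (board.length : Int) = (P ++ [c]) ++ rest' := by
      rw [hdec, List.append_assoc]; rfl
    have hcgrid : pvGrid (board.length : Int) c := by
      apply (pvCells_mem _ c).1
      rw [hdec]
      exact List.mem_append_right _ List.mem_cons_self
    have hprefix := pvPrefix_mem (board.length : Int) P rest' c hdec
    have hcnotP : c ∉ P := by
      intro hc
      have := ((hprefix c).1 hc).2
      unfold pvScanLt at this
      omega
    have hsubP : (P ++ [c]).Sublist (pvCells (board.length : Int)) := by
      rw [hdec']
      exact List.sublist_append_left _ _
    rw [List.foldl_cons]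
    by_cases hcell : pvCell board c.1 c.2 = opp
    · have hstonec : pvStone board opp c := ⟨hcgrid, hcell⟩
      have hndrootsP : ((P.filter (pvFirstB board opp)).map (pvRoot board opp)).Nodup :=
        pvFirsts_prefix_roots_nodup board opp P
          (by rw [hdec]; exact List.sublist_append_left _ _)
      have hkeys : (PySem.Dict.mk ((P.filter (pvFirstB board opp)).map
          (fun f => (pvRoot board opp f, val f)))).keys
          = (P.filter (pvFirstB board opp)).map (pvRoot board opp) := by
        show List.map _ _ = _
        rw [List.map_map]
        rfl
      have hcontiff : (PySem.Dict.mk ((P.filter (pvFirstB board opp)).map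
            (fun f => (pvRoot board opp f, val f)))).contains (pvRoot board opp c) = true ↔
          ∃ f ∈ P.filter (pvFirstB board opp), pvRoot board opp f = pvRoot board opp c := by
        rw [PySem.Dict.contains_iff_mem_keys, hkeys, List.mem_map]
      have hgrp : (∃ f ∈ P.filter (pvFirstB board opp),
          pvRoot board opp f = pvRoot board opp c) ↔ pvFirstB board opp c ≠ true := by
        constructor
        · rintro ⟨f, hf, hr⟩ hfirst
          have hfP := List.mem_of_mem_filter hf
          have hffirst := (pvFirstB_iff board opp f).1 (List.of_mem_filter hf)
          have hconn : pvConn board opp f c :=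
            (pvRootB_iff_conn board opp hffirst.1 hstonec).1 hr
          exact ((pvFirstB_iff board opp c).1 hfirst).2 f hffirst.1
            ((hprefix f).1 hfP).2 hconn
        · intro hnotfirst
          have h1 : ¬ (pvStone board opp c ∧ ∀ c', pvStone board opp c' →
              pvScanLt c' c → ¬ pvConn board opp c' c) := fun hc =>
            hnotfirst ((pvFirstB_iff board opp c).2 hc)
          push_neg at h1
          obtain ⟨c', hc'stone, hc'lt, hc'conn⟩ := h1 hstonec
          obtain ⟨f, hffirst, hfconn, hford⟩ := pvFirst_exists board opp c' hc'stone
          have hfstone := ((pvFirstB_iff board opp f).1 hffirst).1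
          have hflt : pvScanLt f c := by
            rcases hford with h | rfl
            · unfold pvScanLt at h hc'lt ⊢; omega
            · exact hc'lt
          have hfP : f ∈ P := (hprefix f).2 ⟨hfstone.1, hflt⟩
          refine ⟨f, List.mem_filter.2 ⟨hfP, hffirst⟩, ?_⟩
          exact (pvRootB_iff_conn board opp hfstone hstonec).2 (pvEGtrans hfconn hc'conn)
      by_cases hfirstc : pvFirstB board opp c = true
      · -- c is the first stone of a new group: a fresh key is appended
        have hnocont : (PySem.Dict.mk ((P.filter (pvFirstB board opp)).map
            (fun f => (pvRoot board opp f, val f)))).contains (pvRoot board opp c) = false := by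
          rw [Bool.eq_false_iff]
          intro hc
          exact (hgrp.1 (hcontiff.1 hc)) hfirstc
        have hfil : (P ++ [c]).filter (pvFirstB board opp)
            = P.filter (pvFirstB board opp) ++ [c] := by
          rw [List.filter_append]
          simp [hfirstc]
        have hndrootsP' : (((P ++ [c]).filter (pvFirstB board opp)).map
            (pvRoot board opp)).Nodup := pvFirsts_prefix_roots_nodup board opp _ hsubP
        have hbody : pvBBody board opp (board.length : Int)
              (pvPass1 board opp (board.length : Int))
              (PySem.Dict.mk ((P.filter (pvFirstB board opp)).map
                (fun f => (pvRoot board opp f, val f)))) c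
            = [(c.1 - 1, c.2), (c.1 + 1, c.2), (c.1, c.2 - 1), (c.1, c.2 + 1)].foldl
              (fun libs nb =>
                if 0 ≤ nb.1 ∧ nb.1 < (board.length : Int) ∧ 0 ≤ nb.2 ∧
                    nb.2 < (board.length : Int) ∧ pvCell board nb.1 nb.2 = 0
                then PySem.Dict.modify libs (pvRoot board opp c) []
                  (fun s => PySem.Set.add s nb) else libs)
              (PySem.Dict.mk ((((P ++ [c]).filter (pvFirstB board opp))).map
                (fun f => (pvRoot board opp f,
                  if pvRoot board opp f = pvRoot board opp c then [] else val f)))) := by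
          unfold pvBBody
          rw [if_neg (by simpa using hcell)]
          have hins : (PySem.Dict.mk ((P.filter (pvFirstB board opp)).map
                (fun f => (pvRoot board opp f, val f)))).insert (pvRoot board opp c) []
              = PySem.Dict.mk ((((P ++ [c]).filter (pvFirstB board opp))).map
                (fun f => (pvRoot board opp f,
                  if pvRoot board opp f = pvRoot board opp c then [] else val f))) := by
            apply PySem.Dict.ext
            rw [PySem.Dict.items_insert_of_not_contains _ _ hnocont]
            show List.map _ _ ++ _ = List.map _ _
            rw [hfil, List.map_append]
            congr 1
            · apply List.map_congr_left
              intro f hf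
              have hfr : pvRoot board opp f ≠ pvRoot board opp c := by
                intro hr
                exact (hgrp.1 ⟨f, hf, hr⟩) hfirstc
              rw [if_neg hfr]
            · simp
          show ([(c.1 - 1, c.2), (c.1 + 1, c.2), (c.1, c.2 - 1), (c.1, c.2 + 1)].foldl
              (fun libs nb =>
                if 0 ≤ nb.1 ∧ nb.1 < (board.length : Int) ∧ 0 ≤ nb.2 ∧
                    nb.2 < (board.length : Int) ∧ pvCell board nb.1 nb.2 = 0
                then PySem.Dict.modify libs (pvRoot board opp c) []
                  (fun s => PySem.Set.add s nb) else libs)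
              (if (PySem.Dict.mk ((P.filter (pvFirstB board opp)).map
                  (fun f => (pvRoot board opp f, val f)))).contains (pvRoot board opp c)
                then (PySem.Dict.mk ((P.filter (pvFirstB board opp)).map
                  (fun f => (pvRoot board opp f, val f))))
                else (PySem.Dict.mk ((P.filter (pvFirstB board opp)).map
                  (fun f => (pvRoot board opp f, val f)))).insert (pvRoot board opp c) []))
            = _
          rw [hnocont]
          show ([(c.1 - 1, c.2), (c.1 + 1, c.2), (c.1, c.2 - 1), (c.1, c.2 + 1)].foldl
              (fun libs nb =>
                if 0 ≤ nb.1 ∧ nb.1 < (board.length : Int) ∧ 0 ≤ nb.2 ∧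
                    nb.2 < (board.length : Int) ∧ pvCell board nb.1 nb.2 = 0
                then PySem.Dict.modify libs (pvRoot board opp c) []
                  (fun s => PySem.Set.add s nb) else libs)
              ((PySem.Dict.mk ((P.filter (pvFirstB board opp)).map
                  (fun f => (pvRoot board opp f, val f)))).insert (pvRoot board opp c) []))
            = _
          rw [hins]
        rw [hbody, pvInnerFold board opp (board.length : Int) _ _ _ _ c hndrootsP'
          (by rw [hfil]; exact List.mem_append_right _ List.mem_cons_self) rfl
          (fun f hf hr => by
            by_contra hne
            rw [hfil] at hf
            rcases List.mem_append.1 hf with hf' | hf'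
            · exact (hgrp.1 ⟨f, hf', hr⟩) hfirstc
            · exact hne (List.mem_singleton.1 hf'))]
        have hchar' : ∀ f ∈ (P ++ [c]).filter (pvFirstB board opp),
            ((fun f => if pvRoot board opp f = pvRoot board opp c then
              PySem.Set.update (if pvRoot board opp c = pvRoot board opp c then
                ([] : PySem.Set (Int × Int)) else val c)
                ([(c.1 - 1, c.2), (c.1 + 1, c.2), (c.1, c.2 - 1), (c.1, c.2 + 1)].filter
                  (fun nb => decide (0 ≤ nb.1 ∧ nb.1 < (board.length : Int) ∧ 0 ≤ nb.2 ∧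
                    nb.2 < (board.length : Int) ∧ pvCell board nb.1 nb.2 = 0)))
              else (if pvRoot board opp f = pvRoot board opp c then [] else val f)) f).Nodup ∧
            ∀ e, e ∈ (fun f => if pvRoot board opp f = pvRoot board opp c then
              PySem.Set.update (if pvRoot board opp c = pvRoot board opp c then
                ([] : PySem.Set (Int × Int)) else val c)
                ([(c.1 - 1, c.2), (c.1 + 1, c.2), (c.1, c.2 - 1), (c.1, c.2 + 1)].filter
                  (fun nb => decide (0 ≤ nb.1 ∧ nb.1 < (board.length : Int) ∧ 0 ≤ nb.2 ∧
                    nb.2 < (board.length : Int) ∧ pvCell board nb.1 nb.2 = 0)))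
              else (if pvRoot board opp f = pvRoot board opp c then [] else val f)) f ↔
              pvPartialLib board opp f (P ++ [c]) e := by
          intro f hf
          rw [hfil] at hf
          rcases List.mem_append.1 hf with hfP | hfc
          · have hfr : pvRoot board opp f ≠ pvRoot board opp c := by
              intro hr
              exact (hgrp.1 ⟨f, hfP, hr⟩) hfirstc
            obtain ⟨h1, h2⟩ := hchar f hfP
            have hfstone := ((pvFirstB_iff board opp f).1 (List.of_mem_filter hfP)).1
            simp only [if_neg hfr]
            refine ⟨h1, fun e => ?_⟩
            rw [h2 e, pvPartialLib_skip board opp f c P (fun hx =>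
              hfr ((pvRootB_iff_conn board opp hfstone hstonec).2 hx.2))]
          · have hfc' : f = c := List.mem_singleton.1 hfc
            subst hfc'
            simp only [eq_self_iff_true, if_true]
            refine ⟨PySem.Set.nodup_update _ _ List.nodup_nil, fun e => ?_⟩
            rw [PySem.Set.mem_update]
            simp only [List.not_mem_nil, false_or]
            rw [pvLstMem board f e]
            rw [pvPartialLib_snoc board opp f f P hstonec (Relation.EqvGen.refl f)]
            constructor
            · rintro ⟨h1, h2, h3⟩
              exact Or.inr ⟨h2, h3, h1⟩
            · rintro (⟨hg, hcc, p, hp, h1, h2, h3⟩ | ⟨hg, hcc, h3⟩)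
              · exfalso
                have hplt := ((hprefix p).1 hp).2
                exact ((pvFirstB_iff board opp f).1 hfirstc).2 p h1 hplt
                  (pvEGsymm h2)
              · exact ⟨h3, hg, hcc⟩
        obtain ⟨val', heq, hch⟩ := ih (P ++ [c]) _ hdec' hchar'
        have hl : P ++ [c] ++ rest' = P ++ c :: rest' := by simp
        rw [hl] at heq
        exact ⟨val', heq, fun f hf => by
          have hres := hch f (by rw [hl]; exact hf)
          rwa [hl] at hres⟩
      · -- c belongs to an already-keyed group
        obtain ⟨f0, hf0mem, hf0root⟩ := hgrp.2 hfirstc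
        have hf0first := (pvFirstB_iff board opp f0).1 (List.of_mem_filter hf0mem)
        have hcont : (PySem.Dict.mk ((P.filter (pvFirstB board opp)).map
            (fun f => (pvRoot board opp f, val f)))).contains (pvRoot board opp c) = true :=
          hcontiff.2 ⟨f0, hf0mem, hf0root⟩
        have hfil : (P ++ [c]).filter (pvFirstB board opp) = P.filter (pvFirstB board opp) := by
          rw [List.filter_append]
          simp [Bool.eq_false_iff.2 hfirstc]
        have hbody : pvBBody board opp (board.length : Int)
              (pvPass1 board opp (board.length : Int))
              (PySem.Dict.mk ((P.filter (pvFirstB board opp)).map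
                (fun f => (pvRoot board opp f, val f)))) c
            = [(c.1 - 1, c.2), (c.1 + 1, c.2), (c.1, c.2 - 1), (c.1, c.2 + 1)].foldl
              (fun libs nb =>
                if 0 ≤ nb.1 ∧ nb.1 < (board.length : Int) ∧ 0 ≤ nb.2 ∧
                    nb.2 < (board.length : Int) ∧ pvCell board nb.1 nb.2 = 0
                then PySem.Dict.modify libs (pvRoot board opp c) []
                  (fun s => PySem.Set.add s nb) else libs)
              (PySem.Dict.mk ((P.filter (pvFirstB board opp)).map
                (fun f => (pvRoot board opp f, val f)))) := by
          unfold pvBBody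
          rw [if_neg (by simpa using hcell)]
          show ([(c.1 - 1, c.2), (c.1 + 1, c.2), (c.1, c.2 - 1), (c.1, c.2 + 1)].foldl
              (fun libs nb =>
                if 0 ≤ nb.1 ∧ nb.1 < (board.length : Int) ∧ 0 ≤ nb.2 ∧
                    nb.2 < (board.length : Int) ∧ pvCell board nb.1 nb.2 = 0
                then PySem.Dict.modify libs (pvRoot board opp c) []
                  (fun s => PySem.Set.add s nb) else libs)
              (if (PySem.Dict.mk ((P.filter (pvFirstB board opp)).map
                  (fun f => (pvRoot board opp f, val f)))).contains (pvRoot board opp c)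
                then (PySem.Dict.mk ((P.filter (pvFirstB board opp)).map
                  (fun f => (pvRoot board opp f, val f))))
                else (PySem.Dict.mk ((P.filter (pvFirstB board opp)).map
                  (fun f => (pvRoot board opp f, val f)))).insert (pvRoot board opp c) []))
            = _
          rw [hcont]
          rfl
        rw [hbody, pvInnerFold board opp (board.length : Int) _ _ _ _ f0 hndrootsP
          hf0mem hf0root
          (fun f hf hr => List.inj_on_of_nodup_map hndrootsP hf hf0mem
            (hr.trans hf0root.symm))]
        have hchar' : ∀ f ∈ (P ++ [c]).filter (pvFirstB board opp),
            ((fun f => if pvRoot board opp f = pvRoot board opp c then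
              PySem.Set.update (val f0)
                ([(c.1 - 1, c.2), (c.1 + 1, c.2), (c.1, c.2 - 1), (c.1, c.2 + 1)].filter
                  (fun nb => decide (0 ≤ nb.1 ∧ nb.1 < (board.length : Int) ∧ 0 ≤ nb.2 ∧
                    nb.2 < (board.length : Int) ∧ pvCell board nb.1 nb.2 = 0)))
              else val f) f).Nodup ∧
            ∀ e, e ∈ (fun f => if pvRoot board opp f = pvRoot board opp c then
              PySem.Set.update (val f0)
                ([(c.1 - 1, c.2), (c.1 + 1, c.2), (c.1, c.2 - 1), (c.1, c.2 + 1)].filter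
                  (fun nb => decide (0 ≤ nb.1 ∧ nb.1 < (board.length : Int) ∧ 0 ≤ nb.2 ∧
                    nb.2 < (board.length : Int) ∧ pvCell board nb.1 nb.2 = 0)))
              else val f) f ↔ pvPartialLib board opp f (P ++ [c]) e := by
          intro f hf
          rw [hfil] at hf
          have hfstone := ((pvFirstB_iff board opp f).1 (List.of_mem_filter hf)).1
          obtain ⟨h1, h2⟩ := hchar f hf
          by_cases hfr : pvRoot board opp f = pvRoot board opp c
          · have hfeq : f = f0 := List.inj_on_of_nodup_map hndrootsP hf hf0mem
              (hfr.trans hf0root.symm)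
            subst hfeq
            simp only [if_pos hfr]
            have hconn : pvConn board opp f c :=
              (pvRootB_iff_conn board opp hfstone hstonec).1 hfr
            refine ⟨PySem.Set.nodup_update _ _ h1, fun e => ?_⟩
            rw [PySem.Set.mem_update, h2 e, pvLstMem board c e,
              pvPartialLib_snoc board opp f c P hstonec hconn]
            constructor
            · rintro (h | ⟨ha, hb, hc'⟩)
              · exact Or.inl h
              · exact Or.inr ⟨hb, hc', ha⟩
            · rintro (h | ⟨ha, hb, hc'⟩)
              · exact Or.inl h
              · exact Or.inr ⟨hc', ha, hb⟩
          · simp only [if_neg hfr]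
            refine ⟨h1, fun e => ?_⟩
            rw [h2 e, pvPartialLib_skip board opp f c P (fun hx =>
              hfr ((pvRootB_iff_conn board opp hfstone hstonec).2 hx.2))]
        obtain ⟨val', heq, hch⟩ := ih (P ++ [c]) _ hdec' hchar'
        have hl : P ++ [c] ++ rest' = P ++ c :: rest' := by simp
        rw [hl, hfil] at heq
        exact ⟨val', heq, fun f hf => by
          have hres := hch f (by rw [hl]; exact hf)
          rwa [hl] at hres⟩
    · -- not an opponent stone: nothing changes
      have hbody : pvBBody board opp (board.length : Int)
            (pvPass1 board opp (board.length : Int))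
            (PySem.Dict.mk ((P.filter (pvFirstB board opp)).map
              (fun f => (pvRoot board opp f, val f)))) c
          = PySem.Dict.mk ((P.filter (pvFirstB board opp)).map
              (fun f => (pvRoot board opp f, val f))) := by
        unfold pvBBody
        rw [if_pos (by simpa using hcell)]
      have hfirstfalse : pvFirstB board opp c ≠ true := by
        intro hh
        exact hcell ((pvFirstB_iff board opp c).1 hh).1.2
      have hfil : (P ++ [c]).filter (pvFirstB board opp) = P.filter (pvFirstB board opp) := by
        rw [List.filter_append]
        simp [Bool.eq_false_iff.2 hfirstfalse]
      have hchar' : ∀ f ∈ (P ++ [c]).filter (pvFirstB board opp), (val f).Nodup ∧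
          ∀ e, e ∈ val f ↔ pvPartialLib board opp f (P ++ [c]) e := by
        intro f hf
        rw [hfil] at hf
        obtain ⟨h1, h2⟩ := hchar f hf
        refine ⟨h1, fun e => ?_⟩
        rw [h2 e]
        unfold pvPartialLib
        constructor
        · rintro ⟨hg, hc, p, hp, hrest⟩
          exact ⟨hg, hc, p, List.mem_append_left _ hp, hrest⟩
        · rintro ⟨hg, hc, p, hp, hrest⟩
          rcases List.mem_append.1 hp with hp' | hp'
          · exact ⟨hg, hc, p, hp', hrest⟩
          · have : p = c := List.mem_singleton.1 hp'
            subst this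
            exact absurd hrest.1.2 hcell
      obtain ⟨val', heq, hch⟩ := ih (P ++ [c]) val hdec' hchar'
      have hl : P ++ [c] ++ rest' = P ++ c :: rest' := by simp
      rw [hfil, hl] at heq
      rw [hbody]
      exact ⟨val', heq, fun f hf => by
        have hres := hch f (by rw [hl]; exact hf)
        rwa [hl] at hres⟩

-- pass 2 builds: one key per group, in first-stone order, holding that group's liberty set
theorem pvPass2_char (board : List (List Int)) (opp : Int) (hopp : opp ≠ 0) :
    ∃ vals : List (PySem.Set (Int × Int)),
      (pvPass2 board opp (board.length : Int) (pvPass1 board opp (board.length : Int))).items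
        = ((pvFirsts board opp).map (pvRoot board opp)).zip vals ∧
      vals.length = (pvFirsts board opp).length ∧
      ∀ k : Nat, (hk : k < vals.length) → (hfk : k < (pvFirsts board opp).length) →
        vals[k].Nodup ∧
          ∀ e, e ∈ vals[k] ↔ pvIsLib board opp (pvFirsts board opp)[k] e := by
  obtain ⟨val, heq, hch⟩ := pvB_inv board opp hopp (pvCells (board.length : Int)) []
    (fun _ => []) (by simp) (by simp)
  have hpass2 : pvPass2 board opp (board.length : Int) (pvPass1 board opp (board.length : Int))
      = (pvCells (board.length : Int)).foldl
        (pvBBody board opp (board.length : Int) (pvPass1 board opp (board.length : Int)))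
        PySem.Dict.empty :=
    pvFoldlNested (PySem.List.pyRange 0 (board.length : Int) 1)
      (PySem.List.pyRange 0 (board.length : Int) 1)
      (pvBBody board opp (board.length : Int) (pvPass1 board opp (board.length : Int)))
      PySem.Dict.empty
  refine ⟨(pvFirsts board opp).map val, ?_, by simp, ?_⟩
  · rw [hpass2]
    have heq' : (pvCells (board.length : Int)).foldl
        (pvBBody board opp (board.length : Int) (pvPass1 board opp (board.length : Int)))
        PySem.Dict.empty
        = PySem.Dict.mk ((pvFirsts board opp).map (fun f => (pvRoot board opp f, val f))) :=
      heq
    rw [heq']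
    show (pvFirsts board opp).map (fun f => (pvRoot board opp f, val f)) = _
    rw [List.zip_map']
  · intro k hk hfk
    have hmem : (pvFirsts board opp)[k] ∈ pvFirsts board opp := List.getElem_mem hfk
    obtain ⟨h1, h2⟩ := hch (pvFirsts board opp)[k] hmem
    rw [List.getElem_map]
    refine ⟨h1, fun e => ?_⟩
    rw [h2 e]
    unfold pvPartialLib pvIsLib
    constructor
    · rintro ⟨hg, hc, p, _, hrest⟩
      exact ⟨hg, hc, p, hrest⟩
    · rintro ⟨hg, hc, p, h3, h4, h5⟩
      exact ⟨hg, hc, p, by simpa using (pvCells_mem _ p).2 h3.1, h3, h4, h5⟩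


-- ===== VERDICT (by name: the statement is the Claim_ definition above) =====
theorem capture_candidates_spec : Claim_equal_capture_candidates := by
  intro board player _hD _hP
  unfold Spec_capture_candidates
  have hopp0 : (if player = 1 then 2 else 1 : Int) ≠ 0 := by split <;> norm_num
  rw [pvA_char board player (if player = 1 then 2 else 1) rfl,
    pvAlt_eq board player (if player = 1 then 2 else 1) rfl]
  obtain ⟨vals, hitems, hlen, hch⟩ :=
    pvPass2_char board (if player = 1 then 2 else 1) hopp0
  have hvalues : PySem.Dict.values (pvPass2 board (if player = 1 then 2 else 1)
      (board.length : Int) (pvPass1 board (if player = 1 then 2 else 1)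
        (board.length : Int))) = vals := by
    show List.map Prod.snd _ = vals
    rw [hitems]
    exact List.map_snd_zip (by simp [hlen])
  rw [hvalues]
  apply pvCandFold board
  · simp [hlen]
  · intro k hk htk
    have hkF : k < (pvFirsts board (if player = 1 then 2 else 1)).length := by
      simpa using hk
    have hkv : k < vals.length := by rw [hlen]; exact hkF
    set c := (pvFirsts board (if player = 1 then 2 else 1))[k] with hc
    have hcfirst : pvFirstB board (if player = 1 then 2 else 1) c = true :=
      List.of_mem_filter (List.getElem_mem hkF)
    have hcstone := ((pvFirstB_iff board _ c).1 hcfirst).1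
    obtain ⟨_, hlibs, hlibnd⟩ :=
      pvGAL_char board (if player = 1 then 2 else 1) c hcstone hopp0
    obtain ⟨hvnd, hvmem⟩ := hch k hkv hkF
    constructor
    · rw [List.getElem_map]
      exact hlibnd
    refine ⟨hvnd, ?_, ?_⟩
    · intro e
      rw [List.getElem_map, hlibs e, hvmem e]
    · intro e he
      rw [List.getElem_map] at he
      exact ((hlibs e).1 he).2.1
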